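-- pv_equiv track=rewrite | github.com/Galloc333/Harry-Potter-A-star-search | HW1/ex1.py | hungarian_algorithm
-- ===== SOURCE A (Python) =====
-- import math
--
-- def hungarian_algorithm(cost_matrix):
--     n = len(cost_matrix)
--     u = [0] * (n + 1)
--     v = [0] * (n + 1)
--     p = [0] * (n + 1)
--     way = [0] * (n + 1)
--
--     for i in range(1, n + 1):
--         p[0] = i
--         j0 = 0
--         minv = [math.inf] * (n + 1)
--         used = [False] * (n + 1)
--         while True:
--             used[j0] = True
--             i0 = p[j0]
--             j1 = 0
--             delta = math.inf
--             for j in range(1, n + 1):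
--                 if not used[j]:
--                     cur = cost_matrix[i0 - 1][j - 1] - u[i0] - v[j]
--                     if cur < minv[j]:
--                         minv[j] = cur
--                         way[j] = j0
--                     if minv[j] < delta:
--                         delta = minv[j]
--                         j1 = j
--             for jj in range(n + 1):
--                 if used[jj]:
--                     u[p[jj]] += delta
--                     v[jj] -= delta
--                 else:
--                     minv[jj] -= delta
--             j0 = j1
--             if p[j0] == 0:
--                 break
--         while True:
--             j1 = way[j0]
--             p[j0] = p[j1]
--             j0 = j1
--             if j0 == 0:
--                 break
--
--     assignment = p[1:]
--     total_cost = 0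
--     for j in range(1, n + 1):
--         i = assignment[j - 1]
--         total_cost += cost_matrix[i - 1][j - 1]
--     return total_cost
-- ===== SOURCE B (Python) =====
-- import math
--
-- def hungarian_algorithm(cost_matrix):
--     n = len(cost_matrix)
--     size = 1 << n
--     dp = [math.inf] * size
--     dp[0] = 0
--     for mask in range(1, size):
--         i = bin(mask).count("1") - 1
--         best = math.inf
--         for j in range(n):
--             if (mask >> j) & 1:
--                 cand = dp[mask ^ (1 << j)] + cost_matrix[i][j]
--                 if cand < best:
--                     best = cand
--         dp[mask] = best
--     return dp[size - 1]
-- ===== Notes on version B (the rewrite author's own statement) =====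
-- stated objective: alternative
-- what changed: Replaces the dual-potential shortest-augmenting-path Hungarian method by an independent exact algorithm: a bottom-up subset dynamic program over column masks (dp[mask] = cheapest assignment of the first popcount(mask) rows to the column set mask).
import Mathlib
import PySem

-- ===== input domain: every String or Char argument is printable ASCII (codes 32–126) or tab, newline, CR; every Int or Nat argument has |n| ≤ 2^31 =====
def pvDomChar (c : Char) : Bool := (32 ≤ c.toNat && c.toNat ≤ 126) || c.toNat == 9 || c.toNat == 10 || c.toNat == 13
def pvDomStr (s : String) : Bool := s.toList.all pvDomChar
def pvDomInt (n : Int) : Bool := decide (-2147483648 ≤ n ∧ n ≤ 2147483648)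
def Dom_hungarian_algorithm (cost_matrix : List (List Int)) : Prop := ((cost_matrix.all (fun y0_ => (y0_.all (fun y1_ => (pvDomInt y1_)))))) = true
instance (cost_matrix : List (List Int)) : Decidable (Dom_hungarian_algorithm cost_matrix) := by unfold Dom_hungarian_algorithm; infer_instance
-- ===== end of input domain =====

-- B replaces the dual-potential shortest-augmenting-path Hungarian method by a subset-DP over
-- column masks (objective: alternative exact algorithm; no speed claim).

-- ===== PORT A =====
-- cost_matrix[i-1][j-1] for 1-based i,j; exact under Pre_ (all indices visited are in range,
-- out-of-range indexing raises in Python and is excluded by Pre_hungarian_algorithm)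
def cf0 (c : List (List Int)) (i j : ℕ) : Int := (c.getD i []).getD j 0

-- float('inf') sentinel: `none` = math.inf; olt is Python's `<` on int-or-inf values
def olt : Option Int → Option Int → Bool
  | none, _ => false
  | some _, none => true
  | some a, some b => a < b

structure AScanRes where
  minv : ℕ → Option Int
  way : ℕ → ℕ
  delta : Option Int
  j1 : ℕ

-- body of the `for j in range(1, n+1)` pass
def aScanStep (f : ℕ → ℕ → Int) (i0 : ℕ) (u v : ℕ → Int) (j0 : ℕ) (used : ℕ → Bool)
    (st : AScanRes) (j : ℕ) : AScanRes :=
  if used j then st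
  else
    let cur : Int := f (i0 - 1) (j - 1) - u i0 - v j
    let st1 := if olt (some cur) (st.minv j) then
        { st with minv := Function.update st.minv j (some cur)
                , way := Function.update st.way j j0 }
      else st
    if olt (st1.minv j) st1.delta then { st1 with delta := st1.minv j, j1 := j } else st1

-- the `for j in range(1, n+1)` pass (range(1,n+1) transliterated as List.range' 1 n)
def aScan (f : ℕ → ℕ → Int) (n i0 : ℕ) (u v : ℕ → Int) (j0 : ℕ) (used : ℕ → Bool)
    (minv0 : ℕ → Option Int) (way0 : ℕ → ℕ) : AScanRes :=
  (List.range' 1 n).foldl (aScanStep f i0 u v j0 used) ⟨minv0, way0, none, 0⟩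

structure ASt where
  u : ℕ → Int
  v : ℕ → Int
  p : ℕ → ℕ
  way : ℕ → ℕ
  minv : ℕ → Option Int
  used : ℕ → Bool
  j0 : ℕ

-- body of the `for jj in range(n+1)` update pass
def aUpdStep (d : Int) (st : ASt) (jj : ℕ) : ASt :=
  if st.used jj then
    { st with u := Function.update st.u (st.p jj) (st.u (st.p jj) + d)
            , v := Function.update st.v jj (st.v jj - d) }
  else
    { st with minv := Function.update st.minv jj ((st.minv jj).map (fun x => x - d)) }

-- the `for jj in range(n+1)` update pass; under Pre_ delta is always a finite int,
-- so the Python float arithmetic is exact integer arithmetic there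
def aUpdate (n : ℕ) (d : Int) (st : ASt) : ASt :=
  (List.range (n + 1)).foldl (aUpdStep d) st

-- one iteration of the inner `while True` (Dijkstra-like) loop
def aBody (f : ℕ → ℕ → Int) (n : ℕ) (st : ASt) : ASt :=
  let st1 : ASt := { st with used := Function.update st.used st.j0 true }
  let i0 := st1.p st1.j0
  let r := aScan f n i0 st1.u st1.v st1.j0 st1.used st1.minv st1.way
  let st2 : ASt := { st1 with minv := r.minv, way := r.way }
  let st3 := aUpdate n (r.delta.getD 0) st2
  { st3 with j0 := r.j1 }

-- the inner `while True` loop; fuel n+1 bounds its iteration count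
def innerLoop (f : ℕ → ℕ → Int) (n : ℕ) : ℕ → ASt → ASt
  | 0, st => st
  | fuel + 1, st =>
    let st4 := aBody f n st
    if st4.p st4.j0 = 0 then st4 else innerLoop f n fuel st4

-- the augmenting `while True` rewiring loop; fuel n+1 bounds the chain length
def augLoop (way : ℕ → ℕ) : ℕ → ℕ → (ℕ → ℕ) → (ℕ → ℕ)
  | 0, _, p => p
  | fuel + 1, j0, p =>
    let j1 := way j0
    let p1 := Function.update p j0 (p j1)
    if j1 = 0 then p1 else augLoop way fuel j1 p1

def outerStep (f : ℕ → ℕ → Int) (n : ℕ)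
    (s : ((ℕ → Int) × (ℕ → Int) × (ℕ → ℕ) × (ℕ → ℕ))) (i : ℕ) :
    ((ℕ → Int) × (ℕ → Int) × (ℕ → ℕ) × (ℕ → ℕ)) :=
  let (u, v, p, way) := s
  let p1 := Function.update p 0 i
  let st : ASt := ⟨u, v, p1, way, fun _ => none, fun _ => false, 0⟩
  let st' := innerLoop f n (n + 1) st
  let p2 := augLoop st'.way (n + 1) st'.j0 st'.p
  (st'.u, st'.v, p2, st'.way)

def hungarian_algorithm (cost_matrix : List (List Int)) : Int :=
  let n := cost_matrix.length
  let f : ℕ → ℕ → Int := fun i j => cf0 cost_matrix i j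
  let s := (List.range' 1 n).foldl (outerStep f n)
      (fun _ => 0, fun _ => 0, fun _ => 0, fun _ => 0)
  let p := s.2.2.1
  (List.range' 1 n).foldl (fun tc j => tc + f (p j - 1) (j - 1)) 0

-- ===== PORT B =====
-- bin(mask).count("1")
def popcount (m : ℕ) : ℕ :=
  if h : m = 0 then 0 else m % 2 + popcount (m / 2)
decreasing_by exact Nat.div_lt_self (Nat.pos_of_ne_zero h) one_lt_two

-- inf + x = inf; finite + x
def oadd : Option Int → Int → Option Int
  | none, _ => none
  | some a, x => some (a + x)

-- the inner `for j in range(n)` min-scan of Source B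
def bInner (c : List (List Int)) (n : ℕ) (dp : List (Option Int)) (mask i : ℕ) : Option Int :=
  (List.range n).foldl (fun best j =>
    if (mask >>> j) &&& 1 = 1 then
      let cand := oadd (dp.getD (mask ^^^ (1 <<< j)) none) (cf0 c i j)
      if olt cand best then cand else best
    else best) none

-- one iteration of the `for mask in range(1, size)` loop of Source B
def bStep (c : List (List Int)) (n : ℕ) (dp : List (Option Int)) (mask : ℕ) : List (Option Int) :=
  dp.set mask (bInner c n dp mask (popcount mask - 1))

def hungarian_algorithm_alt (cost_matrix : List (List Int)) : Int :=
  let n := cost_matrix.length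
  let size := 2 ^ n
  let dp : List (Option Int) := (List.replicate size (none : Option Int)).set 0 (some 0)
  let dp := (List.range' 1 (size - 1)).foldl (bStep cost_matrix n) dp
  (dp.getD (size - 1) none).getD 0

-- ===== PRECONDITION & SPEC =====
-- Pre_: every row must have at least n = len(cost_matrix) entries; on shorter rows the Python A
-- raises IndexError (it reads cost_matrix[i][j] for all i, j < n), so exactly those inputs are excluded.
def Pre_hungarian_algorithm (cost_matrix : List (List Int)) : Prop :=
  ∀ row ∈ cost_matrix, cost_matrix.length ≤ row.length
instance (cost_matrix : List (List Int)) : Decidable (Pre_hungarian_algorithm cost_matrix) := by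
  unfold Pre_hungarian_algorithm; infer_instance

def pvWitness_hungarian_algorithm : List (List Int) := [[1, 2], [3, 4]]

def Spec_hungarian_algorithm (cost_matrix : List (List Int)) (out : Int) : Prop :=
  out = hungarian_algorithm_alt cost_matrix
instance (cost_matrix : List (List Int)) (out : Int) : Decidable (Spec_hungarian_algorithm cost_matrix out) := by
  unfold Spec_hungarian_algorithm; infer_instance

-- ===== CLAIM (what is proved, stated in full; the proofs are below) =====
def Claim_equal_hungarian_algorithm : Prop := ∀ (cost_matrix : List (List Int)), Dom_hungarian_algorithm cost_matrix → Pre_hungarian_algorithm cost_matrix → Spec_hungarian_algorithm cost_matrix (hungarian_algorithm cost_matrix)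

-- ===== LEMMAS AND PROOFS =====

-- The common specification both ports are proved equal to: `Best f k S` = the minimum, over all
-- ways to assign rows 0..k-1 bijectively to the column set S, of the total cost under f.
def Best (f : ℕ → ℕ → Int) : ℕ → Finset ℕ → Int
  | 0, _ => 0
  | k + 1, S => if h : S.Nonempty then S.inf' h (fun j => Best f k (S.erase j) + f k j) else 0

-- ---------- order helpers for the inf-or-int comparison ----------
theorem olt_irrefl (a : Option Int) : olt a a = false := by
  cases a <;> simp [olt]

theorem olt_false_trans (a b c : Option Int) (h1 : olt a b = false) (h2 : olt b c = false) :
    olt a c = false := by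
  cases a <;> cases b <;> cases c <;> simp [olt] at * <;> omega

theorem olt_asymm (a b : Option Int) (h : olt a b = true) : olt b a = false := by
  cases a <;> cases b <;> simp [olt] at * <;> omega

-- ---------- generic characterisation of the running-min fold ----------
def stepMin (g : ℕ → Option Int) (cond : ℕ → Bool) (b : Option Int) (j : ℕ) : Option Int :=
  if cond j = true then (if olt (g j) b then g j else b) else b

theorem stepMin_le (g : ℕ → Option Int) (cond : ℕ → Bool) (b : Option Int) (j : ℕ) :
    olt b (stepMin g cond b j) = false := by
  unfold stepMin
  split
  · split
    · exact olt_asymm _ _ (by assumption)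
    · exact olt_irrefl b
  · exact olt_irrefl b

theorem foldMin_char (g : ℕ → Option Int) (cond : ℕ → Bool) :
    ∀ (l : List ℕ) (acc : Option Int),
      ((l.foldl (stepMin g cond) acc) = acc ∨
        ∃ j ∈ l, cond j = true ∧ (l.foldl (stepMin g cond) acc) = g j)
      ∧ (olt acc (l.foldl (stepMin g cond) acc) = false)
      ∧ (∀ j ∈ l, cond j = true → olt (g j) (l.foldl (stepMin g cond) acc) = false) := by
  intro l
  induction l with
  | nil => intro acc; refine ⟨Or.inl rfl, olt_irrefl acc, by simp⟩
  | cons j t ih =>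
    intro acc
    simp only [List.foldl_cons]
    obtain ⟨ihA, ihB, ihC⟩ := ih (stepMin g cond acc j)
    have hstep : olt acc (stepMin g cond acc j) = false := stepMin_le g cond acc j
    refine ⟨?_, olt_false_trans _ _ _ hstep ihB, ?_⟩
    · rcases ihA with h | ⟨j', hj', hc, he⟩
      · rw [h]
        unfold stepMin
        split
        · split
          · exact Or.inr ⟨j, by simp, by assumption, rfl⟩
          · exact Or.inl rfl
        · exact Or.inl rfl
      · exact Or.inr ⟨j', by simp [hj'], hc, he⟩
    · intro j' hj' hc
      rcases List.mem_cons.mp hj' with h | h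
      · subst h
        have h1 : olt (g j') (stepMin g cond acc j') = false := by
          unfold stepMin
          rw [hc]
          by_cases holt : olt (g j') acc = true <;> simp [holt, olt_irrefl]
        exact olt_false_trans _ _ _ h1 ihB
      · exact ihC j' h hc

-- ---------- bits / popcount ----------
theorem popcount_zero : popcount 0 = 0 := by unfold popcount; simp

theorem popcount_succ (m : ℕ) (h : m ≠ 0) : popcount m = m % 2 + popcount (m / 2) := by
  rw [popcount]; simp [h]

def bits (n m : ℕ) : Finset ℕ := (Finset.range n).filter (fun j => m.testBit j = true)

theorem mem_bits {n m j : ℕ} : j ∈ bits n m ↔ j < n ∧ m.testBit j = true := by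
  simp [bits]

theorem bits_zero (n : ℕ) : bits n 0 = ∅ := by
  ext j; simp [mem_bits]

theorem card_bits : ∀ (n : ℕ), ∀ m, m < 2 ^ n → (bits n m).card = popcount m := by
  intro n
  induction n with
  | zero =>
    intro m hm
    interval_cases m
    simp [bits_zero, popcount_zero]
  | succ n ih =>
    intro m hm
    by_cases h0 : m = 0
    · subst h0; simp [bits_zero, popcount_zero]
    · rw [popcount_succ m h0]
      have hdiv : m / 2 < 2 ^ n := by
        have : 2 ^ (n + 1) = 2 * 2 ^ n := by ring
        omega
      have himg : bits (n + 1) m =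
          (if m.testBit 0 then {0} else ∅) ∪ (bits n (m / 2)).image (· + 1) := by
        ext j
        cases j with
        | zero =>
          by_cases hb : m.testBit 0 = true <;>
            simp [mem_bits, hb, Finset.mem_image]
        | succ k =>
          have : m.testBit (k + 1) = (m / 2).testBit k := by
            rw [Nat.testBit_add_one]
          by_cases hb : m.testBit 0 = true <;>
            simp [mem_bits, hb, Finset.mem_image, this]
      rw [himg, Finset.card_union_of_disjoint, Finset.card_image_of_injective _ (add_left_injective 1)]
      · have h2 : m % 2 = if m.testBit 0 then 1 else 0 := by
          have := Nat.testBit_zero m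
          rcases Nat.mod_two_eq_zero_or_one m with h | h <;> simp [this, h]
        rw [ih (m / 2) hdiv, h2]
        split <;> simp
      · by_cases hb : m.testBit 0 = true
        · simp only [if_pos hb, Finset.disjoint_left]
          intro x hx
          simp only [Finset.mem_singleton] at hx
          subst hx
          simp only [Finset.mem_image]
          rintro ⟨a, -, ha⟩
          omega
        · simp [hb]

theorem popcount_pos (m : ℕ) (h : m ≠ 0) : 0 < popcount m := by
  induction m using Nat.strong_induction_on with
  | _ m ih =>
    rw [popcount_succ m h]
    rcases Nat.mod_two_eq_zero_or_one m with he | ho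
    · have hne : m / 2 ≠ 0 := by omega
      have := ih (m / 2) (by omega) hne
      omega
    · omega

theorem bits_nonempty (n m : ℕ) (h0 : m ≠ 0) (hm : m < 2 ^ n) : (bits n m).Nonempty := by
  have := card_bits n m hm
  have := popcount_pos m h0
  exact Finset.card_pos.mp (by omega)

theorem testBit_xor_pow (m j k : ℕ) :
    (m ^^^ (1 <<< j)).testBit k = ((m.testBit k) != (decide (j = k))) := by
  rw [Nat.one_shiftLeft, Nat.testBit_xor, Nat.testBit_two_pow]

theorem bits_xor (n m j : ℕ) (hb : m.testBit j = true) :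
    bits n (m ^^^ (1 <<< j)) = (bits n m).erase j := by
  ext k
  simp only [mem_bits, Finset.mem_erase, testBit_xor_pow]
  by_cases hk : j = k
  · subst hk; simp [hb]
  · simp [hk, Ne.symm hk]
    try tauto

theorem xor_pow_lt (m j : ℕ) (hb : m.testBit j = true) : m ^^^ (1 <<< j) < m := by
  apply Nat.lt_of_testBit j
  · rw [testBit_xor_pow]; simp [hb]
  · exact hb
  · intro k hk
    rw [testBit_xor_pow]
    simp [Nat.ne_of_lt hk]

theorem popcount_xor (n m j : ℕ) (hm : m < 2 ^ n) (hj : j < n) (hb : m.testBit j = true) :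
    popcount (m ^^^ (1 <<< j)) = popcount m - 1 := by
  have hlt : m ^^^ (1 <<< j) < 2 ^ n := lt_trans (xor_pow_lt m j hb) hm
  rw [← card_bits n _ hlt, ← card_bits n m hm, bits_xor n m j hb,
    Finset.card_erase_of_mem (mem_bits.mpr ⟨hj, hb⟩)]

-- ---------- dp getD/set helpers ----------
theorem getD_set_self (l : List (Option Int)) (i : ℕ) (a : Option Int) (h : i < l.length) :
    (l.set i a).getD i none = a := by
  rw [List.getD_eq_getElem?_getD, List.getElem?_set_self (by omega)]
  rfl

theorem getD_set_ne (l : List (Option Int)) (i j : ℕ) (a : Option Int) (h : j ≠ i) :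
    (l.set i a).getD j none = l.getD j none := by
  rw [List.getD_eq_getElem?_getD, List.getElem?_set_ne (by omega), ← List.getD_eq_getElem?_getD]

-- ---------- the inner scan computes the Best recursion ----------
theorem bInner_eq (c : List (List Int)) (n mask : ℕ) (dp : List (Option Int))
    (h0 : mask ≠ 0) (hm : mask < 2 ^ n)
    (hdp : ∀ j, j < n → mask.testBit j = true →
      dp.getD (mask ^^^ (1 <<< j)) none =
        some (Best (cf0 c) (popcount mask - 1) ((bits n mask).erase j))) :
    bInner c n dp mask (popcount mask - 1) =
      some (Best (cf0 c) (popcount mask) (bits n mask)) := by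
  have hkpos : 0 < popcount mask := popcount_pos mask h0
  set k := popcount mask - 1 with hk
  have hk1 : popcount mask = k + 1 := by omega
  set S := bits n mask with hS
  have hne : S.Nonempty := bits_nonempty n mask h0 hm
  set g : ℕ → Option Int := fun j => oadd (dp.getD (mask ^^^ (1 <<< j)) none) (cf0 c k j) with hg
  set cond : ℕ → Bool := fun j => decide ((mask >>> j) &&& 1 = 1) with hcond
  have hcondIff : ∀ j, cond j = true ↔ mask.testBit j = true := by
    intro j
    rw [hcond]
    simp only [decide_eq_true_eq]
    rw [Nat.and_one_is_mod, Nat.shiftRight_eq_div_pow, Nat.testBit_eq_decide_div_mod_eq]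
    simp
  have hfold : bInner c n dp mask k = (List.range n).foldl (stepMin g cond) none := by
    unfold bInner
    congr 1
    funext b j
    unfold stepMin
    rw [hcond]
    simp only [decide_eq_true_eq]
    split <;> rfl
  have hgval : ∀ j ∈ S, g j = some (Best (cf0 c) k ((S.erase j)) + cf0 c k j) := by
    intro j hj
    obtain ⟨hjn, hjb⟩ := mem_bits.mp hj
    rw [hg]
    simp only
    rw [hdp j hjn hjb]
    rfl
  obtain ⟨hA, _, hC⟩ := foldMin_char g cond (List.range n) none
  rw [← hfold] at hA hC
  have hne2 := hne
  obtain ⟨j0, hj0⟩ := hne2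
  have hj0n : j0 < n := (mem_bits.mp hj0).1
  have hj0c : cond j0 = true := (hcondIff j0).mpr (mem_bits.mp hj0).2
  rcases hA with h | ⟨j1, hj1r, hj1c, hj1e⟩
  · exfalso
    have := hC j0 (List.mem_range.mpr hj0n) hj0c
    rw [h, hgval j0 hj0] at this
    simp [olt] at this
  · have hj1S : j1 ∈ S := mem_bits.mpr ⟨List.mem_range.mp hj1r, (hcondIff j1).mp hj1c⟩
    have hval : bInner c n dp mask k = some (Best (cf0 c) k (S.erase j1) + cf0 c k j1) := by
      rw [hj1e, hgval j1 hj1S]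
    rw [hval, hk1]
    show _ = some (Best (cf0 c) (k + 1) S)
    have hBest : Best (cf0 c) (k + 1) S =
        S.inf' hne (fun j => Best (cf0 c) k (S.erase j) + cf0 c k j) := by
      conv_lhs => rw [Best]
      rw [dif_pos hne]
    rw [hBest]
    congr 1
    apply le_antisymm
    · apply Finset.le_inf'
      intro j hj
      have h1 := hC j (List.mem_range.mpr (mem_bits.mp hj).1)
        ((hcondIff j).mpr (mem_bits.mp hj).2)
      rw [hval, hgval j hj] at h1
      simp [olt] at h1
      omega
    · exact Finset.inf'_le _ hj1S

-- ---------- the dp fold invariant ----------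
theorem dp_fold (c : List (List Int)) (n : ℕ) :
    ∀ m, m ≤ 2 ^ n - 1 →
      (((List.range' 1 m).foldl (bStep c n)
          ((List.replicate (2 ^ n) (none : Option Int)).set 0 (some 0))).length = 2 ^ n) ∧
      (∀ mask, mask < 2 ^ n →
        ((List.range' 1 m).foldl (bStep c n)
            ((List.replicate (2 ^ n) (none : Option Int)).set 0 (some 0))).getD mask none =
          if mask ≤ m then some (Best (cf0 c) (popcount mask) (bits n mask)) else none) := by
  intro m
  induction m with
  | zero =>
    intro _
    constructor
    · simp
    · intro mask hmask
      simp only [List.range', List.foldl_nil]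
      by_cases h0 : mask = 0
      · subst h0
        rw [getD_set_self _ _ _ (by simp)]
        simp [bits_zero, popcount_zero, Best]
      · rw [getD_set_ne _ _ _ _ h0,
          List.getD_eq_getElem?_getD, List.getElem?_replicate, if_pos hmask, if_neg (by omega)]
        rfl
  | succ m ih =>
    intro hm
    obtain ⟨ihL, ihD⟩ := ih (by omega)
    have hconc : List.range' 1 (m + 1) = List.range' 1 m ++ [1 + m] := by
      rw [List.range'_concat]
      simp
    have hm1 : 1 + m = m + 1 := by omega
    rw [hconc, List.foldl_append, List.foldl_cons, List.foldl_nil, hm1]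
    set prev := (List.range' 1 m).foldl (bStep c n)
      ((List.replicate (2 ^ n) (none : Option Int)).set 0 (some 0)) with hprev
    have hmlt : m + 1 < 2 ^ n := by
      have : 0 < 2 ^ n := Nat.two_pow_pos n
      omega
    have hinner : bInner c n prev (m + 1) (popcount (m + 1) - 1) =
        some (Best (cf0 c) (popcount (m + 1)) (bits n (m + 1))) := by
      apply bInner_eq c n (m + 1) prev (by omega) hmlt
      intro j hjn hjb
      have hxlt : (m + 1) ^^^ (1 <<< j) < m + 1 := xor_pow_lt (m + 1) j hjb
      rw [ihD _ (lt_trans hxlt hmlt), if_pos (by omega), popcount_xor n (m + 1) j hmlt hjn hjb,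
        bits_xor n (m + 1) j hjb]
    constructor
    · rw [bStep, List.length_set, ihL]
    · intro mask hmask
      rw [bStep, hinner]
      by_cases he : mask = m + 1
      · subst he
        rw [getD_set_self _ _ _ (by rw [ihL]; exact hmlt)]
        try simp
      · rw [getD_set_ne _ _ _ _ he, ihD mask hmask]
        by_cases hle : mask ≤ m
        · rw [if_pos hle, if_pos (by omega)]
        · rw [if_neg hle, if_neg (by omega)]

theorem bits_full (n : ℕ) : bits n (2 ^ n - 1) = Finset.range n := by
  ext j
  simp [mem_bits, Nat.testBit_two_pow_sub_one]
  try omega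

theorem hungarian_alt_eq_Best (c : List (List Int)) :
    hungarian_algorithm_alt c =
      Best (cf0 c) c.length ((Finset.range c.length)) := by
  set n := c.length with hn
  obtain ⟨_, hD⟩ := dp_fold c n (2 ^ n - 1) (le_refl _)
  have hpos : 0 < 2 ^ n := Nat.two_pow_pos n
  have hlt : 2 ^ n - 1 < 2 ^ n := by omega
  show ((((List.range' 1 (2 ^ n - 1)).foldl (bStep c n)
      ((List.replicate (2 ^ n) (none : Option Int)).set 0 (some 0))).getD (2 ^ n - 1) none).getD 0) = _
  rw [hD (2 ^ n - 1) hlt, if_pos (le_refl _), bits_full]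
  have hpc : popcount (2 ^ n - 1) = n := by
    rw [← card_bits n _ hlt, bits_full, Finset.card_range]
  rw [hpc]
  rfl

-- ===================== A-side analysis =====================

-- reduced cost of the edge (row p t, column j) under potentials u, v
def redcost (f : ℕ → ℕ → Int) (u v : ℕ → Int) (p : ℕ → ℕ) (t j : ℕ) : Int :=
  f (p t - 1) (j - 1) - u (p t) - v j

structure MatchInv (n i : ℕ) (p : ℕ → ℕ) : Prop where
  ran : ∀ j, 1 ≤ j → j ≤ n → p j = 0 ∨ (1 ≤ p j ∧ p j ≤ i)
  inj : ∀ j j', 1 ≤ j → j ≤ n → 1 ≤ j' → j' ≤ n → p j ≠ 0 → p j = p j' → j = j'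
  sur : ∀ r, 1 ≤ r → r ≤ i → ∃ j, 1 ≤ j ∧ j ≤ n ∧ p j = r

structure OuterInv (f : ℕ → ℕ → Int) (n i : ℕ) (u v : ℕ → Int) (p : ℕ → ℕ) : Prop where
  mat : MatchInv n i p
  tight : ∀ j, 1 ≤ j → j ≤ n → p j ≠ 0 → u (p j) + v j = f (p j - 1) (j - 1)
  feas : ∀ r j, 1 ≤ r → r ≤ i → 1 ≤ j → j ≤ n → u r + v j ≤ f (r - 1) (j - 1)
  uz : ∀ r, i < r → u r = 0

-- ---------- a small positional index on lists ----------
def posIn : List ℕ → ℕ → ℕ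
  | [], _ => 0
  | x :: t, a => if x = a then 0 else posIn t a + 1

theorem posIn_append_mem (a : ℕ) (l l' : List ℕ) (h : a ∈ l) :
    posIn (l ++ l') a = posIn l a := by
  induction l with
  | nil => simp at h
  | cons x t ih =>
    simp only [List.cons_append, posIn]
    by_cases hx : x = a
    · simp [hx]
    · rw [if_neg hx, if_neg hx]
      congr 1
      apply ih
      rcases List.mem_cons.mp h with h' | h'
      · exact absurd h'.symm hx
      · exact h' 

theorem posIn_append_self (a : ℕ) (l : List ℕ) (h : a ∉ l) :
    posIn (l ++ [a]) a = l.length := by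
  induction l with
  | nil => simp [posIn]
  | cons x t ih =>
    simp only [List.cons_append, posIn, List.length_cons]
    rw [if_neg (fun hx => h (by rw [← hx]; exact List.mem_cons_self)),
      ih (fun ht => h (List.mem_cons_of_mem _ ht))]

theorem posIn_lt_length (a : ℕ) (l : List ℕ) (h : a ∈ l) : posIn l a < l.length := by
  induction l with
  | nil => simp at h
  | cons x t ih =>
    simp only [posIn, List.length_cons]
    by_cases hx : x = a
    · simp [hx]
    · rw [if_neg hx]
      have : a ∈ t := by
        rcases List.mem_cons.mp h with h | h
        · exact absurd h.symm hx
        · exact h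
      have := ih this
      omega

structure InnerInv (f : ℕ → ℕ → Int) (n i : ℕ) (st : ASt) (L : List ℕ) : Prop where
  nodup : L.Nodup
  lle : ∀ t ∈ L, t ≤ n
  zmem : L ≠ [] → 0 ∈ L
  useIff : ∀ t, st.used t = true ↔ t ∈ L
  p0 : st.p 0 = i
  mat : MatchInv n (i - 1) st.p
  tightI : ∀ j, 1 ≤ j → j ≤ n → st.p j ≠ 0 → st.u (st.p j) + st.v j = f (st.p j - 1) (j - 1)
  feas : ∀ r j, 1 ≤ r → r ≤ i - 1 → 1 ≤ j → j ≤ n → st.u r + st.v j ≤ f (r - 1) (j - 1)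
  feasI : L ≠ [] → ∀ j, 1 ≤ j → j ≤ n → st.u i + st.v j ≤ f (i - 1) (j - 1)
  uz : ∀ r, i < r → st.u r = 0
  usedMat : ∀ t ∈ L, t ≠ 0 → st.p t ≠ 0
  tree : ∀ t ∈ L, t ≠ 0 → st.way t ∈ L ∧ posIn L (st.way t) < posIn L t ∧
      redcost f st.u st.v st.p (st.way t) t = 0
  j0nm : st.j0 ∉ L
  j0le : st.j0 ≤ n
  j0c : (L = [] ∧ st.j0 = 0) ∨ (L ≠ [] ∧ 1 ≤ st.j0 ∧ st.minv st.j0 = some 0)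
  minvC : ∀ j, 1 ≤ j → j ≤ n → j ∉ L →
      (L = [] ∧ st.minv j = none) ∨
      (∃ m, st.minv j = some m ∧ st.way j ∈ L ∧
        m = redcost f st.u st.v st.p (st.way j) j ∧
        ∀ t ∈ L, m ≤ redcost f st.u st.v st.p t j)

structure ScanSpec (f : ℕ → ℕ → Int) (i0 : ℕ) (u v : ℕ → Int) (j0 : ℕ) (used : ℕ → Bool)
    (minv0 : ℕ → Option Int) (way0 : ℕ → ℕ) (n : ℕ) (r : AScanRes) : Prop where
  unchanged : ∀ j, (j < 1 ∨ n < j ∨ used j = true) → r.minv j = minv0 j ∧ r.way j = way0 j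
  updT : ∀ j, 1 ≤ j → j ≤ n → used j = false →
      olt (some (f (i0 - 1) (j - 1) - u i0 - v j)) (minv0 j) = true →
      r.minv j = some (f (i0 - 1) (j - 1) - u i0 - v j) ∧ r.way j = j0
  updF : ∀ j, 1 ≤ j → j ≤ n → used j = false →
      olt (some (f (i0 - 1) (j - 1) - u i0 - v j)) (minv0 j) = false →
      r.minv j = minv0 j ∧ r.way j = way0 j
  pick : (∃ j, 1 ≤ j ∧ j ≤ n ∧ used j = false) →
      1 ≤ r.j1 ∧ r.j1 ≤ n ∧ used r.j1 = false ∧ r.delta = r.minv r.j1 ∧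
      ∀ j, 1 ≤ j → j ≤ n → used j = false → olt (r.minv j) r.delta = false
  noneD : (¬ ∃ j, 1 ≤ j ∧ j ≤ n ∧ used j = false) → r.delta = none

theorem olt_some (a : Int) (b : Option Int) : olt (some a) b = true ∨ ∃ m, b = some m := by
  cases b
  · left; rfl
  · right; exact ⟨_, rfl⟩

theorem olt_helper (x y d : Option Int) (h1 : olt x d = true) (h2 : olt y d = false) :
    olt y x = false := by
  cases x <;> cases y <;> cases d <;> simp [olt] at * <;> omega

theorem aScan_spec (f : ℕ → ℕ → Int) (i0 : ℕ) (u v : ℕ → Int) (j0 : ℕ) (used : ℕ → Bool)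
    (minv0 : ℕ → Option Int) (way0 : ℕ → ℕ) :
    ∀ n, ScanSpec f i0 u v j0 used minv0 way0 n (aScan f n i0 u v j0 used minv0 way0) := by
  intro n
  induction n with
  | zero =>
    exact ⟨fun j _ => ⟨rfl, rfl⟩, fun j h1 h2 _ _ => absurd h1 (by omega),
      fun j h1 h2 _ _ => absurd h1 (by omega),
      fun ⟨j, h1, h2, _⟩ => absurd h1 (by omega), fun _ => rfl⟩
  | succ n ih =>
    have hconc : aScan f (n + 1) i0 u v j0 used minv0 way0 =
        aScanStep f i0 u v j0 used (aScan f n i0 u v j0 used minv0 way0) (n + 1) := by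
      unfold aScan
      rw [List.range'_concat, List.foldl_append, List.foldl_cons, List.foldl_nil]
      congr 1
      omega
    rw [hconc]
    set R := aScan f n i0 u v j0 used minv0 way0 with hRdef
    by_cases hu : used (n + 1) = true
    · have hstep : aScanStep f i0 u v j0 used R (n + 1) = R := by
        unfold aScanStep; rw [if_pos hu]
      rw [hstep]
      have hne : ∀ j, 1 ≤ j → j ≤ n + 1 → used j = false → j ≤ n := by
        intro j h1 h2 h3
        rcases Nat.lt_or_ge j (n + 1) with h | h
        · omega
        · exfalso
          have : j = n + 1 := by omega
          rw [this] at h3; rw [h3] at hu; exact absurd hu (by simp)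
      refine ⟨?_, ?_, ?_, ?_, ?_⟩
      · intro j hj
        rcases hj with h | h | h
        · exact ih.unchanged j (Or.inl h)
        · exact ih.unchanged j (Or.inr (Or.inl (by omega)))
        · exact ih.unchanged j (Or.inr (Or.inr h))
      · intro j h1 h2 h3 h4
        exact ih.updT j h1 (hne j h1 h2 h3) h3 h4
      · intro j h1 h2 h3 h4
        exact ih.updF j h1 (hne j h1 h2 h3) h3 h4
      · rintro ⟨j, h1, h2, h3⟩
        obtain ⟨a1, a2, a3, a4, a5⟩ := ih.pick ⟨j, h1, hne j h1 h2 h3, h3⟩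
        exact ⟨a1, by omega, a3, a4, fun j' b1 b2 b3 => a5 j' b1 (hne j' b1 b2 b3) b3⟩
      · intro h
        exact ih.noneD (fun ⟨j, h1, h2, h3⟩ => h ⟨j, h1, by omega, h3⟩)
    · have hu' : used (n + 1) = false := by
        cases h : used (n + 1)
        · rfl
        · exact absurd h hu
      have hRm : R.minv (n + 1) = minv0 (n + 1) :=
        (ih.unchanged (n + 1) (Or.inr (Or.inl (by omega)))).1
      have hRw : R.way (n + 1) = way0 (n + 1) :=
        (ih.unchanged (n + 1) (Or.inr (Or.inl (by omega)))).2
      set cur : Int := f (i0 - 1) (n + 1 - 1) - u i0 - v (n + 1) with hcurdef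
      set R1 := if olt (some cur) (R.minv (n + 1)) then
          { R with minv := Function.update R.minv (n + 1) (some cur)
                 , way := Function.update R.way (n + 1) j0 }
        else R with hR1
      have hstep : aScanStep f i0 u v j0 used R (n + 1) =
          if olt (R1.minv (n + 1)) R1.delta then
            { R1 with delta := R1.minv (n + 1), j1 := n + 1 }
          else R1 := by
        unfold aScanStep
        rw [if_neg hu]
      have hR1d : R1.delta = R.delta := by
        rw [hR1]; split <;> rfl
      have hR1j : R1.j1 = R.j1 := by
        rw [hR1]; split <;> rfl
      have hR1o : ∀ j, j ≠ n + 1 → R1.minv j = R.minv j ∧ R1.way j = R.way j := by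
        intro j hj
        rw [hR1]; split
        · exact ⟨Function.update_of_ne hj _ _, Function.update_of_ne hj _ _⟩
        · exact ⟨rfl, rfl⟩
      have hR1T : olt (some cur) (minv0 (n + 1)) = true →
          R1.minv (n + 1) = some cur ∧ R1.way (n + 1) = j0 := by
        intro h
        rw [hR1, hRm, if_pos h]
        exact ⟨Function.update_self _ _ _, Function.update_self _ _ _⟩
      have hR1F : olt (some cur) (minv0 (n + 1)) = false →
          R1.minv (n + 1) = minv0 (n + 1) ∧ R1.way (n + 1) = way0 (n + 1) := by
        intro h
        rw [hR1, hRm, if_neg (by rw [h]; simp)]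
        exact ⟨hRm, hRw⟩
      have hR1some : ∃ mm, R1.minv (n + 1) = some mm := by
        rcases olt_some cur (minv0 (n + 1)) with h | ⟨m, hm⟩
        · exact ⟨cur, (hR1T h).1⟩
        · cases h2 : olt (some cur) (minv0 (n + 1))
          · exact ⟨m, by rw [(hR1F h2).1, hm]⟩
          · exact ⟨cur, (hR1T h2).1⟩
      rw [hstep, hR1d]
      by_cases hpick : olt (R1.minv (n + 1)) R.delta = true
      · rw [if_pos hpick]
        refine ⟨?_, ?_, ?_, ?_, ?_⟩
        · intro j hj
          have hjne : j ≠ n + 1 := by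
            rintro rfl
            rcases hj with h | h | h
            · omega
            · omega
            · rw [h] at hu'; exact absurd hu' (by simp)
          have := hR1o j hjne
          rcases hj with h | h | h
          · exact ⟨this.1.trans (ih.unchanged j (Or.inl h)).1,
              this.2.trans (ih.unchanged j (Or.inl h)).2⟩
          · exact ⟨this.1.trans (ih.unchanged j (Or.inr (Or.inl (by omega)))).1,
              this.2.trans (ih.unchanged j (Or.inr (Or.inl (by omega)))).2⟩
          · exact ⟨this.1.trans (ih.unchanged j (Or.inr (Or.inr h))).1,
              this.2.trans (ih.unchanged j (Or.inr (Or.inr h))).2⟩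
        · intro j h1 h2 h3 h4
          by_cases hj : j = n + 1
          · subst hj; exact hR1T h4
          · have := hR1o j hj
            have h2' : j ≤ n := by omega
            exact ⟨this.1.trans (ih.updT j h1 h2' h3 h4).1, this.2.trans (ih.updT j h1 h2' h3 h4).2⟩
        · intro j h1 h2 h3 h4
          by_cases hj : j = n + 1
          · subst hj; exact hR1F h4
          · have := hR1o j hj
            have h2' : j ≤ n := by omega
            exact ⟨this.1.trans (ih.updF j h1 h2' h3 h4).1, this.2.trans (ih.updF j h1 h2' h3 h4).2⟩
        · intro _
          dsimp only
          refine ⟨by omega, by omega, hu', rfl, ?_⟩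
          intro j b1 b2 b3
          by_cases hj : j = n + 1
          · subst hj
            exact olt_irrefl _
          · have h2' : j ≤ n := by omega
            have hRj : R1.minv j = R.minv j := (hR1o j hj).1
            rw [hRj]
            by_cases hex : ∃ j', 1 ≤ j' ∧ j' ≤ n ∧ used j' = false
            · have := (ih.pick hex).2.2.2.2 j b1 h2' b3
              exact olt_helper _ _ _ hpick this
            · exact absurd ⟨j, b1, h2', b3⟩ hex
        · intro h
          exact absurd ⟨n + 1, by omega, le_refl _, hu'⟩ h
      · rw [if_neg hpick]
        have hex : ∃ j', 1 ≤ j' ∧ j' ≤ n ∧ used j' = false := by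
          by_contra hex
          have hdel : R.delta = none := ih.noneD hex
          obtain ⟨mm, hmm⟩ := hR1some
          rw [hdel, hmm] at hpick
          exact hpick rfl
        have hpick' : olt (R1.minv (n + 1)) R.delta = false := by
          cases h : olt (R1.minv (n + 1)) R.delta
          · rfl
          · exact absurd h hpick
        obtain ⟨a1, a2, a3, a4, a5⟩ := ih.pick hex
        refine ⟨?_, ?_, ?_, ?_, ?_⟩
        · intro j hj
          have hjne : j ≠ n + 1 := by
            rintro rfl
            rcases hj with h | h | h
            · omega
            · omega
            · rw [h] at hu'; exact absurd hu' (by simp)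
          have := hR1o j hjne
          rcases hj with h | h | h
          · exact ⟨this.1.trans (ih.unchanged j (Or.inl h)).1,
              this.2.trans (ih.unchanged j (Or.inl h)).2⟩
          · exact ⟨this.1.trans (ih.unchanged j (Or.inr (Or.inl (by omega)))).1,
              this.2.trans (ih.unchanged j (Or.inr (Or.inl (by omega)))).2⟩
          · exact ⟨this.1.trans (ih.unchanged j (Or.inr (Or.inr h))).1,
              this.2.trans (ih.unchanged j (Or.inr (Or.inr h))).2⟩
        · intro j h1 h2 h3 h4
          by_cases hj : j = n + 1
          · subst hj; exact hR1T h4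
          · have := hR1o j hj
            have h2' : j ≤ n := by omega
            exact ⟨this.1.trans (ih.updT j h1 h2' h3 h4).1, this.2.trans (ih.updT j h1 h2' h3 h4).2⟩
        · intro j h1 h2 h3 h4
          by_cases hj : j = n + 1
          · subst hj; exact hR1F h4
          · have := hR1o j hj
            have h2' : j ≤ n := by omega
            exact ⟨this.1.trans (ih.updF j h1 h2' h3 h4).1, this.2.trans (ih.updF j h1 h2' h3 h4).2⟩
        · intro _
          have hj1ne : R.j1 ≠ n + 1 := by
            intro h
            rw [h] at a2
            omega
          refine ⟨?_, ?_, ?_, ?_, ?_⟩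
          · rw [hR1j]; exact a1
          · rw [hR1j]; omega
          · rw [hR1j]; exact a3
          · rw [hR1j, hR1d, (hR1o R.j1 hj1ne).1]; exact a4
          · intro j b1 b2 b3
            rw [hR1d]
            by_cases hj : j = n + 1
            · subst hj
              exact hpick'
            · rw [(hR1o j hj).1]
              exact a5 j b1 (by omega) b3
        · intro h
          exact absurd ⟨n + 1, by omega, le_refl _, hu'⟩ h

-- ---------- the update pass ----------
structure UpdSpec (d : Int) (st : ASt) (k : ℕ) (st' : ASt) : Prop where
  hp : st'.p = st.p
  hway : st'.way = st.way
  hused : st'.used = st.used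
  huIn : ∀ r, (∃ t, t < k ∧ st.used t = true ∧ st.p t = r) → st'.u r = st.u r + d
  huOut : ∀ r, (¬ ∃ t, t < k ∧ st.used t = true ∧ st.p t = r) → st'.u r = st.u r
  hvIn : ∀ j, j < k → st.used j = true → st'.v j = st.v j - d
  hvOut : ∀ j, ¬ (j < k ∧ st.used j = true) → st'.v j = st.v j
  hmIn : ∀ j, j < k → st.used j = false → st'.minv j = (st.minv j).map (fun x => x - d)
  hmOut : ∀ j, ¬ (j < k ∧ st.used j = false) → st'.minv j = st.minv j

theorem aUpdate_fold (n : ℕ) (d : Int) (st : ASt) :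
    aUpdate n d st = (List.range (n + 1)).foldl (aUpdStep d) st := rfl

theorem aUpdStep_fold_spec (d : Int) (st : ASt)
    (hinj : ∀ a b, st.used a = true → st.used b = true → st.p a = st.p b → a = b) :
    ∀ k, UpdSpec d st k ((List.range k).foldl (aUpdStep d) st) := by
  intro k
  induction k with
  | zero =>
    exact ⟨rfl, rfl, rfl, fun r ⟨t, ht, _⟩ => by omega, fun r _ => rfl,
      fun j hj _ => by omega, fun j _ => rfl, fun j hj _ => by omega, fun j _ => rfl⟩
  | succ k ih =>
    rw [List.range_succ, List.foldl_append, List.foldl_cons, List.foldl_nil]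
    set S := (List.range k).foldl (aUpdStep d) st with hS
    by_cases huk : st.used k = true
    · have hstep : aUpdStep d S k =
          { S with u := Function.update S.u (S.p k) (S.u (S.p k) + d)
                 , v := Function.update S.v k (S.v k - d) } := by
        unfold aUpdStep
        rw [ih.hused, if_pos huk]
      rw [hstep]
      have hpk : S.p k = st.p k := congrFun ih.hp k
      have hnoU : S.u (st.p k) = st.u (st.p k) := by
        apply ih.huOut
        rintro ⟨t, ht1, ht2, ht3⟩
        have := hinj t k ht2 huk ht3
        omega
      have hnoV : S.v k = st.v k := by
        apply ih.hvOut
        rintro ⟨h1, _⟩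
        omega
      refine ⟨ih.hp, ih.hway, ih.hused, ?_, ?_, ?_, ?_, ?_, ?_⟩
      · intro r ⟨t, ht1, ht2, ht3⟩
        dsimp only
        by_cases hr : r = st.p k
        · subst hr
          have hnoU' : S.u (S.p k) = st.u (S.p k) := by rw [hpk]; exact hnoU
          rw [← hpk, Function.update_self, hnoU']
        · have hrne : r ≠ S.p k := by
            intro he
            exact hr (by rw [he, hpk])
          rw [Function.update_of_ne hrne]
          apply ih.huIn
          refine ⟨t, ?_, ht2, ht3⟩
          rcases Nat.lt_or_ge t k with h | h
          · exact h
          · exfalso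
            have : t = k := by omega
            subst this
            exact hr ht3.symm
      · intro r hr
        dsimp only
        have hrne : r ≠ S.p k := by
          intro he
          exact hr ⟨k, by omega, huk, by rw [he, ← hpk]⟩
        rw [Function.update_of_ne hrne]
        apply ih.huOut
        rintro ⟨t, ht1, ht2, ht3⟩
        exact hr ⟨t, by omega, ht2, ht3⟩
      · intro j hj1 hj2
        dsimp only
        by_cases hjk : j = k
        · subst hjk
          rw [Function.update_self, hnoV]
        · rw [Function.update_of_ne hjk]
          exact ih.hvIn j (by omega) hj2
      · intro j hj
        dsimp only
        have hjk : j ≠ k := by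
          rintro rfl
          exact hj ⟨by omega, huk⟩
        rw [Function.update_of_ne hjk]
        apply ih.hvOut
        rintro ⟨h1, h2⟩
        exact hj ⟨by omega, h2⟩
      · intro j hj1 hj2
        exact ih.hmIn j (by
          rcases Nat.lt_or_ge j k with h | h
          · exact h
          · exfalso
            have : j = k := by omega
            subst this
            rw [huk] at hj2
            exact absurd hj2 (by simp)) hj2
      · intro j hj
        apply ih.hmOut
        rintro ⟨h1, h2⟩
        exact hj ⟨by omega, h2⟩
    · have huk' : st.used k = false := by
        cases h : st.used k
        · rfl
        · exact absurd h huk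
      have hstep : aUpdStep d S k =
          { S with minv := Function.update S.minv k ((S.minv k).map (fun x => x - d)) } := by
        unfold aUpdStep
        rw [ih.hused, if_neg (by rw [huk']; simp)]
      rw [hstep]
      have hnoM : S.minv k = st.minv k := by
        apply ih.hmOut
        rintro ⟨h1, _⟩
        omega
      refine ⟨ih.hp, ih.hway, ih.hused, ?_, ?_, ?_, ?_, ?_, ?_⟩
      · intro r ⟨t, ht1, ht2, ht3⟩
        apply ih.huIn
        refine ⟨t, ?_, ht2, ht3⟩
        rcases Nat.lt_or_ge t k with h | h
        · exact h
        · exfalso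
          have : t = k := by omega
          subst this
          rw [huk'] at ht2
          exact absurd ht2 (by simp)
      · intro r hr
        apply ih.huOut
        rintro ⟨t, ht1, ht2, ht3⟩
        exact hr ⟨t, by omega, ht2, ht3⟩
      · intro j hj1 hj2
        exact ih.hvIn j (by
          rcases Nat.lt_or_ge j k with h | h
          · exact h
          · exfalso
            have : j = k := by omega
            subst this
            rw [huk'] at hj2
            exact absurd hj2 (by simp)) hj2
      · intro j hj
        apply ih.hvOut
        rintro ⟨h1, h2⟩
        exact hj ⟨by omega, h2⟩
      · intro j hj1 hj2
        dsimp only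
        by_cases hjk : j = k
        · subst hjk
          rw [Function.update_self, hnoM]
        · rw [Function.update_of_ne hjk]
          exact ih.hmIn j (by omega) hj2
      · intro j hj
        dsimp only
        by_cases hjk : j = k
        · subst hjk
          exfalso
          exact hj ⟨by omega, huk'⟩
        · rw [Function.update_of_ne hjk]
          apply ih.hmOut
          rintro ⟨h1, h2⟩
          exact hj ⟨by omega, h2⟩

theorem aUpdate_spec (n : ℕ) (d : Int) (st : ASt)
    (hinj : ∀ a b, st.used a = true → st.used b = true → st.p a = st.p b → a = b) :
    UpdSpec d st (n + 1) (aUpdate n d st) := by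
  rw [aUpdate_fold]
  exact aUpdStep_fold_spec d st hinj (n + 1)

-- ---------- an unused column always exists ----------
theorem exists_unused (n i : ℕ) (p : ℕ → ℕ) (L1 : List ℕ) (hi : 1 ≤ i) (hin : i ≤ n)
    (hms : ∀ t ∈ L1, t ≠ 0 → 1 ≤ p t ∧ p t ≤ i - 1)
    (hinj : ∀ a b, a ∈ L1 → b ∈ L1 → a ≠ 0 → b ≠ 0 → p a = p b → a = b) :
    ∃ j, 1 ≤ j ∧ j ≤ n ∧ j ∉ L1 := by
  by_contra h
  push Not at h
  have hsub : Finset.Icc 1 n ⊆ L1.toFinset.erase 0 := by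
    intro j hj
    rw [Finset.mem_Icc] at hj
    rw [Finset.mem_erase, List.mem_toFinset]
    exact ⟨by omega, h j hj.1 hj.2⟩
  have hcard : (L1.toFinset.erase 0).card ≤ (Finset.Icc 1 (i - 1)).card := by
    apply Finset.card_le_card_of_injOn p
    · intro t ht
      rw [Finset.mem_coe, Finset.mem_erase, List.mem_toFinset] at ht
      rw [Finset.mem_coe, Finset.mem_Icc]
      have := hms t ht.2 ht.1
      omega
    · intro a ha b hb hab
      rw [Finset.mem_coe, Finset.mem_erase, List.mem_toFinset] at ha hb
      exact hinj a b ha.2 hb.2 ha.1 hb.1 hab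
  rw [Nat.card_Icc] at hcard
  have h1 : n ≤ (L1.toFinset.erase 0).card := by
    have h2 := Finset.card_le_card hsub
    rw [Nat.card_Icc] at h2
    omega
  omega

-- ---------- the body of the inner loop preserves the invariant ----------
theorem body_preserve (f : ℕ → ℕ → Int) (n i : ℕ) (st : ASt) (L : List ℕ)
    (hi : 1 ≤ i) (hin : i ≤ n)
    (hInv : InnerInv f n i st L) (hcont : st.p st.j0 ≠ 0) :
    InnerInv f n i (aBody f n st) (L ++ [st.j0]) ∧ (aBody f n st).p = st.p := by
  obtain ⟨hnd, hll, hzm, hui, hP0, hmat, hti, hfe, hfeI, huzz, hum, htr, hj0nm, hj0le, hj0c, hmc⟩ := hInv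
  set L1 := L ++ [st.j0] with hL1
  have hmemL1 : ∀ t, t ∈ L1 ↔ (t ∈ L ∨ t = st.j0) := by
    intro t; simp [hL1, List.mem_append]
  have hnodup1 : L1.Nodup := by
    rw [hL1, List.nodup_append]
    exact ⟨hnd, List.nodup_singleton _, by
      intro a ha b hbmem
      rcases List.mem_cons.mp hbmem with h | h
      · subst h
        intro heq
        subst heq
        exact hj0nm ha
      · simp at h⟩
  have hlle1 : ∀ t ∈ L1, t ≤ n := by
    intro t ht
    rcases (hmemL1 t).mp ht with h | h
    · exact hll t h
    · exact h ▸ hj0le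
  have hzmem1 : 0 ∈ L1 := by
    rcases hj0c with ⟨hL, hj0z⟩ | ⟨hL, _, _⟩
    · exact (hmemL1 0).mpr (Or.inr hj0z.symm)
    · exact (hmemL1 0).mpr (Or.inl (hzm hL))
  have hL1ne : L1 ≠ [] := by simp [hL1]
  set used1 := Function.update st.used st.j0 true with hused1
  have huseIff1 : ∀ t, used1 t = true ↔ t ∈ L1 := by
    intro t
    rw [hused1, Function.update_apply]
    by_cases ht : t = st.j0
    · simp [ht, hmemL1]
    · rw [if_neg ht]
      rw [hui t, hmemL1 t]
      constructor
      · exact Or.inl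
      · rintro (h | h)
        · exact h
        · exact absurd h ht
  have hunused1 : ∀ j, j ∉ L1 → used1 j = false := by
    intro j h
    cases hq : used1 j
    · rfl
    · exact absurd ((huseIff1 j).mp hq) h
  have hpL1range : ∀ t ∈ L1, t ≠ 0 → 1 ≤ st.p t ∧ st.p t ≤ i - 1 := by
    intro t ht htz
    rcases (hmemL1 t).mp ht with h | h
    · have hp := hum t h htz
      rcases hmat.ran t (by omega) (hll t h) with h' | h'
      · exact absurd h' hp
      · exact h'
    · subst h
      rcases hmat.ran st.j0 (by omega) hj0le with h' | h'
      · exact absurd h' hcont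
      · exact h'
  have hpinj1 : ∀ a b, a ∈ L1 → b ∈ L1 → st.p a = st.p b → a = b := by
    intro a b ha hb hab
    by_cases haz : a = 0
    · by_cases hbz : b = 0
      · omega
      · exfalso
        subst haz
        rw [hP0] at hab
        have := hpL1range b hb hbz
        omega
    · by_cases hbz : b = 0
      · exfalso
        subst hbz
        rw [hP0] at hab
        have := hpL1range a ha haz
        omega
      · have h1 := hpL1range a ha haz
        have h2 := hpL1range b hb hbz
        exact hmat.inj a b (by omega) (hlle1 a ha) (by omega) (hlle1 b hb) (by omega) hab
  set i0 := st.p st.j0 with hi0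
  set R := aScan f n i0 st.u st.v st.j0 used1 st.minv st.way with hRdef
  have hSS : ScanSpec f i0 st.u st.v st.j0 used1 st.minv st.way n R :=
    aScan_spec f i0 st.u st.v st.j0 used1 st.minv st.way n
  obtain ⟨jw, hjw1, hjw2, hjw3⟩ :=
    exists_unused n i st.p L1 hi hin hpL1range (fun a b ha hb _ _ => hpinj1 a b ha hb)
  have hexu : ∃ j, 1 ≤ j ∧ j ≤ n ∧ used1 j = false := ⟨jw, hjw1, hjw2, hunused1 jw hjw3⟩
  obtain ⟨hj1ge, hj1le, hj1u, hdelta_eq, hdmin⟩ := hSS.pick hexu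
  have hj1nm : R.j1 ∉ L1 := by
    intro h
    rw [(huseIff1 R.j1).mpr h] at hj1u
    exact absurd hj1u (by simp)
  have hmprop : ∀ j, 1 ≤ j → j ≤ n → j ∉ L1 →
      ∃ m, R.minv j = some m ∧ R.way j ∈ L1 ∧
        m = redcost f st.u st.v st.p (R.way j) j ∧
        ∀ t ∈ L1, m ≤ redcost f st.u st.v st.p t j := by
    intro j h1 h2 hjnm
    have h3 : used1 j = false := hunused1 j hjnm
    have hjnL : j ∉ L := fun h => hjnm ((hmemL1 j).mpr (Or.inl h))
    cases himp : olt (some (f (i0 - 1) (j - 1) - st.u i0 - st.v j)) (st.minv j) with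
    | true =>
      obtain ⟨hm, hw⟩ := hSS.updT j h1 h2 h3 himp
      refine ⟨_, hm, ?_, ?_, ?_⟩
      · rw [hw]; exact (hmemL1 _).mpr (Or.inr rfl)
      · rw [hw]
        simp only [redcost, hi0]
      · intro t ht
        rcases (hmemL1 t).mp ht with htL | htj0
        · rcases hmc j h1 h2 hjnL with ⟨hLnil, _⟩ | ⟨m0, hm0, _, _, hb⟩
          · rw [hLnil] at htL
            exact absurd htL List.not_mem_nil
          · rw [hm0] at himp
            simp only [olt, decide_eq_true_eq] at himp
            have := hb t htL
            simp only [redcost] at this ⊢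
            omega
        · subst htj0
          simp only [redcost, hi0]
          exact le_refl _
    | false =>
      obtain ⟨hm, hw⟩ := hSS.updF j h1 h2 h3 himp
      rcases hmc j h1 h2 hjnL with ⟨hLnil, hnone⟩ | ⟨m0, hm0, hwayL, hmeq, hb⟩
      · rw [hnone] at himp
        exact absurd himp (by simp [olt])
      · have hcurge : m0 ≤ f (i0 - 1) (j - 1) - st.u i0 - st.v j := by
          rw [hm0] at himp
          simp only [olt, decide_eq_false_iff_not] at himp
          omega
        refine ⟨m0, by rw [hm, hm0], ?_, ?_, ?_⟩
        · rw [hw]; exact (hmemL1 _).mpr (Or.inl hwayL)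
        · rw [hw]; exact hmeq
        · intro t ht
          rcases (hmemL1 t).mp ht with htL | htj0
          · exact hb t htL
          · subst htj0
            simp only [redcost, hi0] at hcurge ⊢
            omega
  obtain ⟨dm, hdm, hdw, hdeq, hdb⟩ := hmprop R.j1 hj1ge hj1le hj1nm
  have hdelta : R.delta = some dm := by rw [hdelta_eq, hdm]
  have hgetD : R.delta.getD 0 = dm := by rw [hdelta]; rfl
  have hdle : ∀ j, 1 ≤ j → j ≤ n → j ∉ L1 → ∀ mj, R.minv j = some mj → dm ≤ mj := by
    intro j h1 h2 hjL mj hmj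
    have := hdmin j h1 h2 (hunused1 j hjL)
    rw [hmj, hdelta] at this
    simp only [olt, decide_eq_false_iff_not] at this
    omega
  have hd0 : L ≠ [] → 0 ≤ dm := by
    intro hL
    rw [hdeq]
    by_cases htz : R.way R.j1 = 0
    · rw [htz]
      have := hfeI hL R.j1 hj1ge hj1le
      simp only [redcost, hP0]
      omega
    · have hr := hpL1range (R.way R.j1) hdw htz
      have := hfe (st.p (R.way R.j1)) R.j1 hr.1 (by omega) hj1ge hj1le
      simp only [redcost]
      omega
  set st2 : ASt := { st with used := used1, minv := R.minv, way := R.way } with hst2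
  have hb_eq : aBody f n st = { aUpdate n (R.delta.getD 0) st2 with j0 := R.j1 } := rfl
  rw [hgetD] at hb_eq
  set st3 := aUpdate n dm st2 with hst3
  have hinj2 : ∀ a b, st2.used a = true → st2.used b = true → st2.p a = st2.p b → a = b := by
    intro a b ha hb hab
    exact hpinj1 a b ((huseIff1 a).mp ha) ((huseIff1 b).mp hb) hab
  have U : UpdSpec dm st2 (n + 1) st3 := aUpdate_spec n dm st2 hinj2
  have hp32 : st3.p = st.p := U.hp
  have huse32 : st3.used = used1 := U.hused
  have hway3 : st3.way = R.way := U.hway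
  have hTR : ∀ r, (∃ t, t < n + 1 ∧ used1 t = true ∧ st.p t = r) ↔ (∃ t ∈ L1, st.p t = r) := by
    intro r
    constructor
    · rintro ⟨t, _, h2, h3⟩
      exact ⟨t, (huseIff1 t).mp h2, h3⟩
    · rintro ⟨t, h1, h2⟩
      exact ⟨t, by have := hlle1 t h1; omega, (huseIff1 t).mpr h1, h2⟩
  have huIn : ∀ r, (∃ t ∈ L1, st.p t = r) → st3.u r = st.u r + dm :=
    fun r h => U.huIn r ((hTR r).mpr h)
  have huOut : ∀ r, (¬ ∃ t ∈ L1, st.p t = r) → st3.u r = st.u r :=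
    fun r h => U.huOut r (fun h' => h ((hTR r).mp h'))
  have hvIn : ∀ j ∈ L1, st3.v j = st.v j - dm :=
    fun j h => U.hvIn j (by have := hlle1 j h; omega) ((huseIff1 j).mpr h)
  have hvOut : ∀ j, j ∉ L1 → st3.v j = st.v j := by
    intro j h
    apply U.hvOut
    rintro ⟨_, h2⟩
    exact h ((huseIff1 j).mp h2)
  have hmInU : ∀ j, j ≤ n → j ∉ L1 → st3.minv j = (R.minv j).map (fun x => x - dm) := by
    intro j h1 h2
    exact U.hmIn j (by omega) (hunused1 j h2)
  have hred_shift : ∀ t ∈ L1, ∀ j, j ∉ L1 →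
      redcost f st3.u st3.v st.p t j = redcost f st.u st.v st.p t j - dm := by
    intro t ht j hj
    simp only [redcost]
    rw [huIn (st.p t) ⟨t, ht, rfl⟩, hvOut j hj]
    ring
  have hred_same : ∀ t ∈ L1, ∀ s ∈ L1,
      redcost f st3.u st3.v st.p t s = redcost f st.u st.v st.p t s := by
    intro t ht s hs
    simp only [redcost]
    rw [huIn (st.p t) ⟨t, ht, rfl⟩, hvIn s hs]
    ring
  have hLneOf : ∀ j, 1 ≤ j → j ∈ L1 → L ≠ [] := by
    intro j h1 hj hL
    rcases (hmemL1 j).mp hj with h | h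
    · rw [hL] at h
      exact absurd h List.not_mem_nil
    · rcases hj0c with ⟨_, hz⟩ | ⟨hLne', _, _⟩
      · omega
      · exact hLne' hL
  rw [hb_eq]
  refine ⟨⟨hnodup1, hlle1, fun _ => hzmem1, ?_, ?_, ?_, ?_, ?_, ?_, ?_, ?_, ?_, ?_, ?_, ?_, ?_⟩, ?_⟩
  · -- useIff
    intro t
    dsimp only
    rw [huse32]
    exact huseIff1 t
  · -- p0
    dsimp only
    rw [hp32]
    exact hP0
  · -- mat
    dsimp only
    rw [hp32]
    exact hmat
  · -- tightI
    intro j h1 h2 hpj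
    dsimp only at hpj ⊢
    rw [hp32] at hpj ⊢
    by_cases hjL : j ∈ L1
    · rw [huIn (st.p j) ⟨j, hjL, rfl⟩, hvIn j hjL]
      have := hti j h1 h2 hpj
      omega
    · have hnTR : ¬ ∃ t ∈ L1, st.p t = st.p j := by
        rintro ⟨t, ht, hteq⟩
        by_cases htz : t = 0
        · subst htz
          rw [hP0] at hteq
          rcases hmat.ran j h1 h2 with h | h
          · exact hpj h
          · omega
        · have hb1 := hpL1range t ht htz
          have := hmat.inj t j (by omega) (hlle1 t ht) h1 h2 (by omega) hteq
          subst this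
          exact hjL ht
      rw [huOut (st.p j) hnTR, hvOut j hjL]
      exact hti j h1 h2 hpj
  · -- feas
    intro r j hr1 hr2 hj1 hj2
    dsimp only
    by_cases hTRr : ∃ t ∈ L1, st.p t = r
    · rw [huIn r hTRr]
      by_cases hjL : j ∈ L1
      · rw [hvIn j hjL]
        have := hfe r j hr1 hr2 hj1 hj2
        omega
      · obtain ⟨mj, hmj, _, _, hbj⟩ := hmprop j hj1 hj2 hjL
        have hdmj : dm ≤ mj := hdle j hj1 hj2 hjL mj hmj
        obtain ⟨t, htL1, hteq⟩ := hTRr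
        have := hbj t htL1
        simp only [redcost] at this
        rw [hteq] at this
        rw [hvOut j hjL]
        omega
    · rw [huOut r hTRr]
      by_cases hjL : j ∈ L1
      · rw [hvIn j hjL]
        have hd := hd0 (hLneOf j hj1 hjL)
        have := hfe r j hr1 hr2 hj1 hj2
        omega
      · rw [hvOut j hjL]
        exact hfe r j hr1 hr2 hj1 hj2
  · -- feasI
    intro _ j hj1 hj2
    dsimp only
    have hTRi : ∃ t ∈ L1, st.p t = i := ⟨0, hzmem1, hP0⟩
    rw [huIn i hTRi]
    by_cases hjL : j ∈ L1
    · rw [hvIn j hjL]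
      have := hfeI (hLneOf j hj1 hjL) j hj1 hj2
      omega
    · obtain ⟨mj, hmj, _, _, hbj⟩ := hmprop j hj1 hj2 hjL
      have hdmj : dm ≤ mj := hdle j hj1 hj2 hjL mj hmj
      have := hbj 0 hzmem1
      simp only [redcost, hP0] at this
      rw [hvOut j hjL]
      omega
  · -- uz
    intro r hr
    dsimp only
    have hnTR : ¬ ∃ t ∈ L1, st.p t = r := by
      rintro ⟨t, ht, hteq⟩
      by_cases htz : t = 0
      · subst htz
        rw [hP0] at hteq
        omega
      · have := hpL1range t ht htz
        omega
    rw [huOut r hnTR]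
    exact huzz r hr
  · -- usedMat
    intro t ht htz
    dsimp only
    rw [hp32]
    rcases (hmemL1 t).mp ht with h | h
    · exact hum t h htz
    · rw [h]
      exact hcont
  · -- tree
    intro t ht htz
    dsimp only
    rw [hp32, hway3]
    rcases (hmemL1 t).mp ht with htL | htj0
    · have hut : used1 t = true := (huseIff1 t).mpr ht
      have hwt : R.way t = st.way t := (hSS.unchanged t (Or.inr (Or.inr hut))).2
      obtain ⟨w1, w2, w3⟩ := htr t htL htz
      rw [hwt]
      have hw1' : st.way t ∈ L1 := (hmemL1 _).mpr (Or.inl w1)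
      refine ⟨hw1', ?_, ?_⟩
      · rw [hL1, posIn_append_mem _ _ _ w1, posIn_append_mem _ _ _ htL]
        exact w2
      · rw [hred_same (st.way t) hw1' t ht]
        exact w3
    · subst htj0
      rcases hj0c with ⟨_, hz⟩ | ⟨hLne, hj0ge, hj0minv⟩
      · omega
      · rcases hmc st.j0 (by omega) hj0le hj0nm with ⟨hL, _⟩ | ⟨m0, hm0, hwL, hmeq, _⟩
        · exact absurd hL hLne
        · have hm00 : m0 = 0 := by
            rw [hj0minv] at hm0
            simpa using hm0.symm
          have hut : used1 st.j0 = true := (huseIff1 st.j0).mpr ht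
          have hwt : R.way st.j0 = st.way st.j0 := (hSS.unchanged st.j0 (Or.inr (Or.inr hut))).2
          rw [hwt]
          have hwL1 : st.way st.j0 ∈ L1 := (hmemL1 _).mpr (Or.inl hwL)
          refine ⟨hwL1, ?_, ?_⟩
          · rw [hL1, posIn_append_mem _ _ _ hwL, posIn_append_self _ _ hj0nm]
            exact posIn_lt_length _ _ hwL
          · rw [hred_same (st.way st.j0) hwL1 st.j0 ht, ← hmeq, hm00]
  · -- j0nm
    dsimp only
    exact hj1nm
  · -- j0le
    dsimp only
    exact hj1le
  · -- j0c
    right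
    dsimp only
    refine ⟨hL1ne, hj1ge, ?_⟩
    rw [hmInU R.j1 hj1le hj1nm, hdm]
    simp
  · -- minvC
    intro j h1 h2 hjL1
    right
    dsimp only
    rw [hp32, hway3]
    obtain ⟨mj, hmj, hwj, hmeqj, hbj⟩ := hmprop j h1 h2 hjL1
    refine ⟨mj - dm, ?_, hwj, ?_, ?_⟩
    · rw [hmInU j h2 hjL1, hmj]
      rfl
    · rw [hred_shift (R.way j) hwj j hjL1]
      omega
    · intro t ht
      rw [hred_shift t ht j hjL1]
      have := hbj t ht
      omega
  · -- p preserved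
    dsimp only
    exact hp32

-- ---------- entering the inner loop ----------
theorem entry_inv (f : ℕ → ℕ → Int) (n i : ℕ) (u v : ℕ → Int) (p way : ℕ → ℕ)
    (hO : OuterInv f n (i - 1) u v p) (hi : 1 ≤ i) :
    InnerInv f n i ⟨u, v, Function.update p 0 i, way, fun _ => none, fun _ => false, 0⟩ [] := by
  have hp1 : ∀ j, 1 ≤ j → Function.update p 0 i j = p j := by
    intro j hj
    exact Function.update_of_ne (by omega) _ _
  refine ⟨List.nodup_nil, by simp, by simp, by simp,
    by show Function.update p 0 i 0 = i; exact Function.update_self _ _ _, ?_, ?_, ?_,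
    by simp, ?_, by simp, by simp, by simp, by show (0 : ℕ) ≤ n; exact Nat.zero_le n,
    Or.inl ⟨rfl, rfl⟩, ?_⟩
  · refine ⟨?_, ?_, ?_⟩
    · intro j h1 h2
      dsimp only
      rw [hp1 j h1]
      exact hO.mat.ran j h1 h2
    · intro j j' h1 h2 h3 h4 h5 h6
      dsimp only at h5 h6
      rw [hp1 j h1, hp1 j' h3] at h6
      rw [hp1 j h1] at h5
      exact hO.mat.inj j j' h1 h2 h3 h4 h5 h6
    · intro r h1 h2
      obtain ⟨j, a, b, c⟩ := hO.mat.sur r h1 h2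
      refine ⟨j, a, b, ?_⟩
      dsimp only
      rw [hp1 j a]
      exact c
  · intro j h1 h2 h3
    dsimp only at h3 ⊢
    rw [hp1 j h1] at h3 ⊢
    exact hO.tight j h1 h2 h3
  · intro r j h1 h2 h3 h4
    exact hO.feas r j h1 h2 h3 h4
  · intro r hr
    exact hO.uz r (by omega)
  · intro j h1 h2 _
    exact Or.inl ⟨rfl, rfl⟩

-- ---------- a nodup list of values ≤ n has length ≤ n+1 ----------
theorem nodup_length_le (n : ℕ) (C : List ℕ) (hnd : C.Nodup) (hle : ∀ t ∈ C, t ≤ n) :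
    C.length ≤ n + 1 := by
  have h1 : C.toFinset.card = C.length := List.toFinset_card_of_nodup hnd
  have h2 : C.toFinset ⊆ Finset.range (n + 1) := by
    intro t ht
    rw [List.mem_toFinset] at ht
    rw [Finset.mem_range]
    have := hle t ht
    omega
  have := Finset.card_le_card h2
  rw [Finset.card_range] at this
  omega

-- ---------- running the inner loop to the break ----------
theorem inner_run (f : ℕ → ℕ → Int) (n i : ℕ) :
    ∀ (fuel : ℕ) (st : ASt) (L : List ℕ), InnerInv f n i st L → 1 ≤ i → i ≤ n →
      st.p st.j0 ≠ 0 → n + 1 ≤ fuel + L.length →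
      ∃ L', InnerInv f n i (innerLoop f n fuel st) L' ∧ L' ≠ [] ∧
        (innerLoop f n fuel st).p = st.p ∧
        (innerLoop f n fuel st).p ((innerLoop f n fuel st).j0) = 0 := by
  intro fuel
  induction fuel with
  | zero =>
    intro st L hInv _ _ _ hfuel
    exfalso
    have h1 : L.toFinset.card = L.length := List.toFinset_card_of_nodup hInv.nodup
    have h2 : L.toFinset ⊆ (Finset.range (n + 1)).erase st.j0 := by
      intro t ht
      rw [List.mem_toFinset] at ht
      rw [Finset.mem_erase, Finset.mem_range]
      refine ⟨fun he => hInv.j0nm (he ▸ ht), ?_⟩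
      have := hInv.lle t ht
      omega
    have h3 := Finset.card_le_card h2
    rw [Finset.card_erase_of_mem (by rw [Finset.mem_range]; have := hInv.j0le; omega),
      Finset.card_range] at h3
    omega
  | succ fuel ih =>
    intro st L hInv hi hin hcont hfuel
    have hb := body_preserve f n i st L hi hin hInv hcont
    have hunf : innerLoop f n (fuel + 1) st =
        if (aBody f n st).p ((aBody f n st).j0) = 0 then aBody f n st
        else innerLoop f n fuel (aBody f n st) := rfl
    rw [hunf]
    by_cases hstop : (aBody f n st).p ((aBody f n st).j0) = 0
    · rw [if_pos hstop]
      exact ⟨L ++ [st.j0], hb.1, by simp, hb.2, hstop⟩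
    · rw [if_neg hstop]
      obtain ⟨L', a, b, c, d⟩ := ih (aBody f n st) (L ++ [st.j0]) hb.1 hi hin hstop (by
        rw [List.length_append, List.length_singleton]
        omega)
      exact ⟨L', a, b, c.trans hb.2, d⟩

-- ---------- way-chains ----------
inductive WChain (way : ℕ → ℕ) : List ℕ → Prop
  | single (t : ℕ) : way t = 0 → WChain way [t]
  | cons (t t' : ℕ) (rest : List ℕ) : way t = t' → WChain way (t' :: rest) →
      WChain way (t :: t' :: rest)

theorem wchain_way_tail (way : ℕ → ℕ) (C : List ℕ) (h : WChain way C) :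
    ∀ b ∈ C, way b = 0 ∨ way b ∈ C.tail := by
  induction h with
  | single t ht =>
    intro b hb
    rw [List.mem_singleton] at hb
    subst hb
    exact Or.inl ht
  | cons t t' rest hw _ ih =>
    intro b hb
    rcases List.mem_cons.mp hb with h | h
    · subst h
      exact Or.inr (hw ▸ List.mem_cons_self)
    · rcases ih b h with h' | h'
      · exact Or.inl h'
      · exact Or.inr (List.mem_cons_of_mem _ h')

theorem wchain_zero_unique (way : ℕ → ℕ) (C : List ℕ) (h : WChain way C) (h0 : 0 ∉ C)
    (hnd : C.Nodup) : ∀ a b, a ∈ C → b ∈ C → way a = 0 → way b = 0 → a = b := by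
  induction h with
  | single t ht =>
    intro a b ha hb _ _
    rw [List.mem_singleton] at ha hb
    omega
  | cons t t' rest hw hC ih =>
    intro a b ha hb hwa hwb
    have ht'ne : t' ≠ 0 := fun h => h0 (by rw [← h]; exact List.mem_cons_of_mem _ List.mem_cons_self)
    rcases List.mem_cons.mp ha with h | h
    · subst h
      rw [hw] at hwa
      exact absurd hwa ht'ne
    · rcases List.mem_cons.mp hb with h' | h'
      · subst h'
        rw [hw] at hwb
        exact absurd hwb ht'ne
      · exact ih (fun hm => h0 (List.mem_cons_of_mem _ hm)) (List.Nodup.of_cons hnd) a b h h' hwa hwb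

theorem wchain_way_inj (way : ℕ → ℕ) (C : List ℕ) (h : WChain way C) (h0 : 0 ∉ C)
    (hnd : C.Nodup) : ∀ a b, a ∈ C → b ∈ C → way a = way b → a = b := by
  induction h with
  | single t ht =>
    intro a b ha hb _
    rw [List.mem_singleton] at ha hb
    omega
  | cons t t' rest hw hC ih =>
    intro a b ha hb hab
    have hnt : t' ∉ rest := (List.nodup_cons.mp (List.Nodup.of_cons hnd)).1
    have ht'ne : t' ≠ 0 := fun h => h0 (by rw [← h]; exact List.mem_cons_of_mem _ List.mem_cons_self)
    have htail : ∀ x ∈ t' :: rest, way x = t' → False := by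
      intro x hx hwx
      rcases wchain_way_tail way _ hC x hx with h' | h'
      · rw [hwx] at h'
        exact ht'ne h'
      · rw [hwx] at h'
        exact hnt h'
    rcases List.mem_cons.mp ha with h | h
    · subst h
      rcases List.mem_cons.mp hb with h' | h'
      · omega
      · exfalso
        rw [hw] at hab
        exact htail b h' hab.symm
    · rcases List.mem_cons.mp hb with h' | h'
      · subst h'
        exfalso
        rw [hw] at hab
        exact htail a h hab
      · exact ih (fun hm => h0 (List.mem_cons_of_mem _ hm)) (List.Nodup.of_cons hnd) a b h h' hab

theorem wchain_exists_zero (way : ℕ → ℕ) (C : List ℕ) (h : WChain way C) :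
    ∃ t ∈ C, way t = 0 := by
  induction h with
  | single t ht => exact ⟨t, List.mem_singleton_self t, ht⟩
  | cons t t' rest hw hC ih =>
    obtain ⟨s, hs, hws⟩ := ih
    exact ⟨s, List.mem_cons_of_mem _ hs, hws⟩

theorem wchain_pred (way : ℕ → ℕ) (C : List ℕ) (h : WChain way C) :
    ∀ b ∈ C.tail, ∃ a ∈ C, way a = b := by
  induction h with
  | single t ht => simp
  | cons t t' rest hw hC ih =>
    intro b hb
    rcases List.mem_cons.mp hb with h | h
    · subst h
      exact ⟨t, List.mem_cons_self, hw⟩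
    · obtain ⟨a, ha, hwa⟩ := ih b h
      exact ⟨a, List.mem_cons_of_mem _ ha, hwa⟩

theorem chain_exists (way : ℕ → ℕ) (L : List ℕ)
    (htr : ∀ t ∈ L, t ≠ 0 → way t ∈ L ∧ posIn L (way t) < posIn L t) :
    ∀ k t, posIn L t ≤ k → t ∈ L → t ≠ 0 →
      ∃ C, WChain way (t :: C) ∧ (∀ s ∈ C, s ∈ L ∧ s ≠ 0 ∧ posIn L s < posIn L t) ∧
        (t :: C).Nodup := by
  intro k
  induction k with
  | zero =>
    intro t hpos htL htz
    by_cases hw : way t = 0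
    · exact ⟨[], WChain.single t hw, by simp, List.nodup_singleton _⟩
    · exfalso
      have := htr t htL htz
      omega
  | succ k ih =>
    intro t hpos htL htz
    by_cases hw : way t = 0
    · exact ⟨[], WChain.single t hw, by simp, List.nodup_singleton _⟩
    · obtain ⟨hwL, hwlt⟩ := (htr t htL htz)
      obtain ⟨C', hC', hprop, hnd'⟩ := ih (way t) (by omega) hwL hw
      refine ⟨way t :: C', WChain.cons _ _ _ rfl hC', ?_, ?_⟩
      · intro s hs
        rcases List.mem_cons.mp hs with h | h
        · exact h ▸ ⟨hwL, hw, hwlt⟩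
        · obtain ⟨ha, hb, hc⟩ := hprop s h
          exact ⟨ha, hb, by omega⟩
      · rw [List.nodup_cons]
        refine ⟨?_, hnd'⟩
        intro htm
        rcases List.mem_cons.mp htm with h | h
        · rw [← h] at hwlt
          omega
        · have := hprop t h
          omega

-- ---------- closed form of the augmenting loop ----------
theorem augLoop_closed (way : ℕ → ℕ) :
    ∀ (C : List ℕ) (j0 : ℕ) (p : ℕ → ℕ) (fuel : ℕ),
      WChain way (j0 :: C) → (j0 :: C).Nodup → 0 ∉ (j0 :: C) → (j0 :: C).length ≤ fuel →
      augLoop way fuel j0 p = fun t => if t ∈ j0 :: C then p (way t) else p t := by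
  intro C
  induction C with
  | nil =>
    intro j0 p fuel hC hnd h0 hlen
    cases hC with
    | single _ hw =>
      cases fuel with
      | zero => simp at hlen
      | succ fuel =>
        have hred : augLoop way (fuel + 1) j0 p =
            if way j0 = 0 then Function.update p j0 (p (way j0))
            else augLoop way fuel (way j0) (Function.update p j0 (p (way j0))) := rfl
        rw [hred, if_pos hw]
        funext t
        by_cases ht : t = j0
        · subst ht
          rw [Function.update_self, if_pos List.mem_cons_self]
        · rw [Function.update_of_ne ht, if_neg (by simp [ht])]
  | cons c rest ih =>
    intro j0 p fuel hC hnd h0 hlen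
    cases hC with
    | cons _ _ _ hw hC' =>
      cases fuel with
      | zero => simp at hlen
      | succ fuel =>
        have hred : augLoop way (fuel + 1) j0 p =
            if way j0 = 0 then Function.update p j0 (p (way j0))
            else augLoop way fuel (way j0) (Function.update p j0 (p (way j0))) := rfl
        have hc0 : c ≠ 0 := fun h => h0 (by rw [← h]; exact List.mem_cons_of_mem _ List.mem_cons_self)
        rw [hred, if_neg (by rw [hw]; exact hc0), hw]
        set p1 := Function.update p j0 (p c) with hp1
        have hj0n : j0 ∉ c :: rest := (List.nodup_cons.mp hnd).1
        have hj0z : j0 ≠ 0 := fun h => h0 (h ▸ List.mem_cons_self)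
        rw [ih c p1 fuel hC' (List.Nodup.of_cons hnd) (fun h => h0 (List.mem_cons_of_mem _ h))
          (by simp at hlen ⊢; omega)]
        funext t
        by_cases ht : t ∈ c :: rest
        · rw [if_pos ht, if_pos (List.mem_cons_of_mem _ ht)]
          have hwt : way t ≠ j0 := by
            rcases wchain_way_tail way _ hC' t ht with h | h
            · intro he
              rw [he] at h
              exact h0 (h ▸ List.mem_cons_self)
            · intro he
              rw [he] at h
              exact hj0n (List.mem_cons_of_mem _ h)
          rw [hp1, Function.update_of_ne hwt]
        · by_cases htj : t = j0
          · subst htj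
            rw [if_neg ht, if_pos List.mem_cons_self, hw, hp1, Function.update_self]
          · rw [if_neg ht, if_neg (by
              intro h
              rcases List.mem_cons.mp h with h' | h'
              · exact htj h'
              · exact ht h'), hp1, Function.update_of_ne htj]

-- ---------- the augmenting step restores the outer invariant for i rows ----------
theorem aug_spec (f : ℕ → ℕ → Int) (n i : ℕ) (st : ASt) (L : List ℕ)
    (hInv : InnerInv f n i st L) (hi : 1 ≤ i) (hin : i ≤ n)
    (hbreak : st.p st.j0 = 0) :
    OuterInv f n i st.u st.v (augLoop st.way (n + 1) st.j0 st.p) := by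
  obtain ⟨hnd, hll, hzm, hui, hP0, hmat, hti, hfe, hfeI, huzz, hum, htr, hj0nm, hj0le, hj0c, hmc⟩ := hInv
  have hLne : L ≠ [] := by
    rcases hj0c with ⟨hL, hz⟩ | ⟨hL, _, _⟩
    · exfalso
      rw [hz, hP0] at hbreak
      omega
    · exact hL
  have hj0cc : L ≠ [] ∧ 1 ≤ st.j0 ∧ st.minv st.j0 = some 0 := by
    rcases hj0c with ⟨hL, _⟩ | h
    · exact absurd hL hLne
    · exact h
  obtain ⟨_, hj0ge, hj0minv⟩ := hj0cc
  have hmcc : ∃ m, st.minv st.j0 = some m ∧ st.way st.j0 ∈ L ∧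
      m = redcost f st.u st.v st.p (st.way st.j0) st.j0 ∧
      ∀ t ∈ L, m ≤ redcost f st.u st.v st.p t st.j0 := by
    rcases hmc st.j0 hj0ge hj0le hj0nm with ⟨hL, _⟩ | h
    · exact absurd hL hLne
    · exact h
  obtain ⟨m0, hm0, hwL, hmeq, _⟩ := hmcc
  have hm00 : m0 = 0 := by
    rw [hj0minv] at hm0
    simpa using hm0.symm
  have hj0tight : redcost f st.u st.v st.p (st.way st.j0) st.j0 = 0 := by
    rw [← hmeq, hm00]
  have htr' : ∀ t ∈ L, t ≠ 0 → st.way t ∈ L ∧ posIn L (st.way t) < posIn L t :=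
    fun t ht htz => ⟨(htr t ht htz).1, (htr t ht htz).2.1⟩
  have hchain : ∃ C0, WChain st.way (st.j0 :: C0) ∧ (∀ s ∈ C0, s ∈ L ∧ s ≠ 0) ∧
      (st.j0 :: C0).Nodup := by
    by_cases hw : st.way st.j0 = 0
    · exact ⟨[], WChain.single _ hw, by simp, List.nodup_singleton _⟩
    · obtain ⟨C', hC', hprop, hnd'⟩ :=
        chain_exists st.way L htr' (posIn L (st.way st.j0)) (st.way st.j0) (le_refl _) hwL hw
      refine ⟨st.way st.j0 :: C', WChain.cons _ _ _ rfl hC', ?_, ?_⟩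
      · intro s hs
        rcases List.mem_cons.mp hs with h | h
        · exact h ▸ ⟨hwL, hw⟩
        · exact ⟨(hprop s h).1, (hprop s h).2.1⟩
      · rw [List.nodup_cons]
        refine ⟨?_, hnd'⟩
        intro hmem
        rcases List.mem_cons.mp hmem with h | h
        · exact hj0nm (h ▸ hwL)
        · exact hj0nm ((hprop _ h).1)
  obtain ⟨C0, hC, hCmem, hCnd⟩ := hchain
  set C := st.j0 :: C0 with hCdef
  have hCL : ∀ t ∈ C, t ≠ 0 := by
    intro t ht
    rcases List.mem_cons.mp ht with h | h
    · subst h; omega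
    · exact (hCmem t h).2
  have h0C : 0 ∉ C := fun h => (hCL 0 h) rfl
  have hCrange : ∀ t ∈ C, 1 ≤ t ∧ t ≤ n := by
    intro t ht
    rcases List.mem_cons.mp ht with h | h
    · subst h; exact ⟨hj0ge, hj0le⟩
    · have h2 := hll t (hCmem t h).1
      have h3 := (hCmem t h).2
      exact ⟨by omega, h2⟩
  have hClen : C.length ≤ n + 1 := nodup_length_le n C hCnd (fun t ht => (hCrange t ht).2)
  have hclosed : augLoop st.way (n + 1) st.j0 st.p =
      fun t => if t ∈ C then st.p (st.way t) else st.p t :=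
    augLoop_closed st.way C0 st.j0 st.p (n + 1) hC hCnd h0C hClen
  rw [hclosed]
  set p2 : ℕ → ℕ := fun t => if t ∈ C then st.p (st.way t) else st.p t with hp2
  have htail : ∀ t ∈ C, st.way t = 0 ∨ st.way t ∈ C0 := by
    intro t ht
    exact wchain_way_tail st.way C hC t ht
  have hj0nC0 : st.j0 ∉ C0 := (List.nodup_cons.mp hCnd).1
  have hwmemL : ∀ t ∈ C, st.way t ≠ 0 → st.way t ∈ L ∧ st.way t ≠ 0 ∧ st.way t ≠ st.j0 := by
    intro t ht hw
    rcases htail t ht with h | h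
    · contradiction
    · exact ⟨(hCmem _ h).1, (hCmem _ h).2, fun he => hj0nC0 (he ▸ h)⟩
  have hinC : ∀ t, t ∈ C → p2 t = st.p (st.way t) := by
    intro t ht
    simp only [hp2]
    rw [if_pos ht]
  have houtC : ∀ t, t ∉ C → p2 t = st.p t := by
    intro t ht
    simp only [hp2]
    rw [if_neg ht]
  have hvalZ : ∀ t ∈ C, st.way t = 0 → p2 t = i := by
    intro t ht hw
    rw [hinC t ht, hw, hP0]
  have hvalN : ∀ t ∈ C, st.way t ≠ 0 → 1 ≤ p2 t ∧ p2 t ≤ i - 1 := by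
    intro t ht hw
    obtain ⟨hwl, hwz, _⟩ := hwmemL t ht hw
    have hr := hum (st.way t) hwl hwz
    rcases hmat.ran (st.way t) (by omega) (hll _ hwl) with h | h
    · exact absurd h hr
    · rw [hinC t ht]
      exact h
  refine ⟨⟨?_, ?_, ?_⟩, ?_, ?_, ?_⟩
  · -- ran
    intro j h1 h2
    by_cases hj : j ∈ C
    · right
      by_cases hw : st.way j = 0
      · rw [hvalZ j hj hw]; omega
      · have := hvalN j hj hw
        omega
    · rw [houtC j hj]
      rcases hmat.ran j h1 h2 with h | h
      · exact Or.inl h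
      · right; omega
  · -- inj
    intro j j' h1 h2 h3 h4 h5 h6
    by_cases hj : j ∈ C <;> by_cases hj' : j' ∈ C
    · by_cases hw : st.way j = 0 <;> by_cases hw' : st.way j' = 0
      · exact wchain_zero_unique st.way C hC h0C hCnd j j' hj hj' hw hw'
      · exfalso
        have e1 := hvalZ j hj hw
        have e2 := hvalN j' hj' hw'
        rw [e1] at h6
        omega
      · exfalso
        have e1 := hvalN j hj hw
        have e2 := hvalZ j' hj' hw'
        rw [e2] at h6
        omega
      · have w1 := hwmemL j hj hw
        have w2 := hwmemL j' hj' hw'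
        rw [hinC j hj, hinC j' hj'] at h6
        rw [hinC j hj] at h5
        have heq := hmat.inj (st.way j) (st.way j') (by omega) (hll _ w1.1) (by omega)
          (hll _ w2.1) h5 h6
        exact wchain_way_inj st.way C hC h0C hCnd j j' hj hj' heq
    · exfalso
      rw [houtC j' hj'] at h6
      by_cases hw : st.way j = 0
      · rw [hvalZ j hj hw] at h6
        rcases hmat.ran j' h3 h4 with h | h
        · omega
        · omega
      · have w1 := hwmemL j hj hw
        rw [hinC j hj] at h6 h5
        have heq := hmat.inj (st.way j) j' (by omega) (hll _ w1.1) h3 h4 h5 h6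
        rcases htail j hj with h | h
        · exact hw h
        · exact hj' (heq ▸ (List.mem_cons_of_mem _ h))
    · exfalso
      rw [houtC j hj] at h6 h5
      by_cases hw : st.way j' = 0
      · rw [hvalZ j' hj' hw] at h6
        rcases hmat.ran j h1 h2 with h | h
        · omega
        · omega
      · have w2 := hwmemL j' hj' hw
        rw [hinC j' hj'] at h6
        have heq := hmat.inj j (st.way j') h1 h2 (by omega) (hll _ w2.1) h5 h6
        rcases htail j' hj' with h | h
        · exact hw h
        · exact hj (heq ▸ (List.mem_cons_of_mem _ h))
    · rw [houtC j hj] at h6 h5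
      rw [houtC j' hj'] at h6
      exact hmat.inj j j' h1 h2 h3 h4 h5 h6
  · -- sur
    intro r h1 h2
    by_cases hri : r = i
    · obtain ⟨t, htC, hwt⟩ := wchain_exists_zero st.way C hC
      refine ⟨t, (hCrange t htC).1, (hCrange t htC).2, ?_⟩
      rw [hvalZ t htC hwt, hri]
    · have hr2 : r ≤ i - 1 := by omega
      obtain ⟨j, hj1, hj2, hj3⟩ := hmat.sur r h1 hr2
      by_cases hj : j ∈ C
      · rcases List.mem_cons.mp hj with h | h
        · exfalso
          rw [h, hbreak] at hj3
          omega
        · obtain ⟨a, haC, hwa⟩ := wchain_pred st.way C hC j h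
          refine ⟨a, (hCrange a haC).1, (hCrange a haC).2, ?_⟩
          rw [hinC a haC, hwa, hj3]
      · refine ⟨j, hj1, hj2, ?_⟩
        rw [houtC j hj, hj3]
  · -- tight
    intro j h1 h2 h5
    by_cases hj : j ∈ C
    · rw [hinC j hj]
      have hz : redcost f st.u st.v st.p (st.way j) j = 0 := by
        rcases List.mem_cons.mp hj with h | h
        · rw [h]
          exact hj0tight
        · exact (htr j (hCmem j h).1 (hCmem j h).2).2.2
      simp only [redcost] at hz
      omega
    · rw [houtC j hj]
      rw [houtC j hj] at h5
      exact hti j h1 h2 h5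
  · -- feas
    intro r j h1 h2 h3 h4
    by_cases hr : r ≤ i - 1
    · exact hfe r j h1 hr h3 h4
    · have hri : r = i := by omega
      subst hri
      exact hfeI hLne j h3 h4
  · -- uz
    exact huzz

-- ---------- one outer iteration ----------
theorem outerStep_inv (f : ℕ → ℕ → Int) (n i : ℕ) (u v : ℕ → Int) (p way : ℕ → ℕ)
    (hO : OuterInv f n (i - 1) u v p) (hi : 1 ≤ i) (hin : i ≤ n) :
    OuterInv f n i (outerStep f n (u, v, p, way) i).1 (outerStep f n (u, v, p, way) i).2.1
      (outerStep f n (u, v, p, way) i).2.2.1 := by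
  set stE : ASt := ⟨u, v, Function.update p 0 i, way, fun _ => none, fun _ => false, 0⟩ with hstE
  have hEinv : InnerInv f n i stE [] := entry_inv f n i u v p way hO hi
  have hEcont : stE.p stE.j0 ≠ 0 := by
    show Function.update p 0 i 0 ≠ 0
    rw [Function.update_self]
    omega
  obtain ⟨L', hInv', hLne', hpeq, hbreak⟩ :=
    inner_run f n i (n + 1) stE [] hEinv hi hin hEcont (by simp)
  exact aug_spec f n i (innerLoop f n (n + 1) stE) L' hInv' hi hin hbreak

-- ---------- the outer fold maintains the invariant ----------
theorem outer_fold (f : ℕ → ℕ → Int) (n : ℕ) :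
    ∀ m, m ≤ n →
      OuterInv f n m
        (((List.range' 1 m).foldl (outerStep f n)
          (fun _ => 0, fun _ => 0, fun _ => 0, fun _ => 0)).1)
        (((List.range' 1 m).foldl (outerStep f n)
          (fun _ => 0, fun _ => 0, fun _ => 0, fun _ => 0)).2.1)
        (((List.range' 1 m).foldl (outerStep f n)
          (fun _ => 0, fun _ => 0, fun _ => 0, fun _ => 0)).2.2.1) := by
  intro m
  induction m with
  | zero =>
    intro _
    refine ⟨⟨?_, ?_, ?_⟩, ?_, ?_, ?_⟩
    · intro j _ _
      exact Or.inl rfl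
    · intro j j' _ _ _ _ h5 _
      exact absurd rfl h5
    · intro r h1 h2
      exact absurd h1 (by omega)
    · intro j _ _ h
      exact absurd rfl h
    · intro r j h1 h2 _ _
      exact absurd h1 (by omega)
    · intro r _
      rfl
  | succ m ih =>
    intro hm
    rw [List.range'_concat, List.foldl_append, List.foldl_cons, List.foldl_nil]
    have harg : 1 + 1 * m = m + 1 := by omega
    rw [harg]
    set s := (List.range' 1 m).foldl (outerStep f n)
      (fun _ => (0 : Int), fun _ => (0 : Int), fun _ => (0 : ℕ), fun _ => (0 : ℕ)) with hs
    have hOm : OuterInv f n m s.1 s.2.1 s.2.2.1 := ih (by omega)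
    have hstep := outerStep_inv f n (m + 1) s.1 s.2.1 s.2.2.1 s.2.2.2
      (by rw [Nat.add_sub_cancel]; exact hOm) (by omega) hm
    exact hstep

-- ---------- a full matching matches every column ----------
theorem full_match (n : ℕ) (p : ℕ → ℕ) (M : MatchInv n n p) :
    ∀ j, 1 ≤ j → j ≤ n → p j ≠ 0 := by
  intro j hj1 hj2
  by_contra hz
  have hz' : p j = 0 := by omega
  set S := (Finset.Icc 1 n).filter (fun x => p x ≠ 0) with hS
  have hsurj : Set.SurjOn p S (Finset.Icc 1 n) := by
    intro r hr
    rw [Finset.coe_Icc, Set.mem_Icc] at hr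
    obtain ⟨jj, a, b, c⟩ := M.sur r hr.1 hr.2
    refine ⟨jj, ?_, c⟩
    rw [Finset.mem_coe, hS, Finset.mem_filter, Finset.mem_Icc]
    exact ⟨⟨a, b⟩, by rw [c]; omega⟩
  have h1 : (Finset.Icc 1 n).card ≤ S.card := Finset.card_le_card_of_surjOn p hsurj
  have h2 : S ⊆ (Finset.Icc 1 n).erase j := by
    intro x hx
    rw [hS, Finset.mem_filter] at hx
    rw [Finset.mem_erase]
    refine ⟨?_, hx.1⟩
    rintro rfl
    exact hx.2 hz'
  have h3 := Finset.card_le_card h2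
  rw [Finset.card_erase_of_mem (by rw [Finset.mem_Icc]; omega)] at h3
  rw [Nat.card_Icc] at h1 h3
  omega

-- ---------- sums over the final fold ----------
theorem foldl_add_g (g : ℕ → Int) : ∀ (l : List ℕ) (acc : Int),
    l.foldl (fun a j => a + g j) acc = acc + (l.map g).sum := by
  intro l
  induction l with
  | nil => intro acc; simp
  | cons x t ih =>
    intro acc
    rw [List.foldl_cons, ih, List.map_cons, List.sum_cons]
    ring

theorem sum_range'_eq (g : ℕ → Int) (n : ℕ) :
    ((List.range' 1 n).map g).sum = ∑ j0 ∈ Finset.range n, g (1 + j0) := by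
  induction n with
  | zero => simp
  | succ n ih =>
    rw [List.range'_concat, List.map_append, List.sum_append, Finset.sum_range_succ, ih]
    norm_num

-- ---------- lower bound: any dual-feasible potentials bound Best from below ----------
theorem Best_ge (f : ℕ → ℕ → Int) (u v : ℕ → Int) :
    ∀ (k : ℕ) (S : Finset ℕ), S.card = k →
      (∀ r0, r0 < k → ∀ j0 ∈ S, u (r0 + 1) + v (j0 + 1) ≤ f r0 j0) →
      (∑ r0 ∈ Finset.range k, u (r0 + 1)) + (∑ j0 ∈ S, v (j0 + 1)) ≤ Best f k S := by
  intro k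
  induction k with
  | zero =>
    intro S hcard _
    have hS : S = ∅ := Finset.card_eq_zero.mp hcard
    subst hS
    simp [Best]
  | succ k ih =>
    intro S hcard hfeas
    have hne : S.Nonempty := Finset.card_pos.mp (by omega)
    have hBest : Best f (k + 1) S = S.inf' hne (fun j => Best f k (S.erase j) + f k j) := by
      conv_lhs => rw [Best]
      rw [dif_pos hne]
    rw [hBest]
    apply Finset.le_inf'
    intro j hj
    have hcard' : (S.erase j).card = k := by
      rw [Finset.card_erase_of_mem hj]
      omega
    have hih := ih (S.erase j) hcard'
      (fun r0 hr j0 hj0 => hfeas r0 (by omega) j0 (Finset.mem_of_mem_erase hj0))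
    have hsum : (∑ j0 ∈ S.erase j, v (j0 + 1)) + v (j + 1) = ∑ j0 ∈ S, v (j0 + 1) :=
      Finset.sum_erase_add S _ hj
    rw [Finset.sum_range_succ]
    have hf := hfeas k (by omega) j hj
    omega

-- ---------- upper bound: Best is at most the cost of any perfect matching ----------
theorem Best_le (f : ℕ → ℕ → Int) (p : ℕ → ℕ) :
    ∀ (k : ℕ) (S : Finset ℕ), S.card = k →
      (∀ j0 ∈ S, 1 ≤ p (j0 + 1) ∧ p (j0 + 1) ≤ k) →
      (∀ a b, a ∈ S → b ∈ S → p (a + 1) = p (b + 1) → a = b) →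
      (∀ r, 1 ≤ r → r ≤ k → ∃ j0 ∈ S, p (j0 + 1) = r) →
      Best f k S ≤ ∑ j0 ∈ S, f (p (j0 + 1) - 1) j0 := by
  intro k
  induction k with
  | zero =>
    intro S hcard _ _ _
    have hS : S = ∅ := Finset.card_eq_zero.mp hcard
    subst hS
    simp [Best]
  | succ k ih =>
    intro S hcard hran hinj hsur
    have hne : S.Nonempty := Finset.card_pos.mp (by omega)
    obtain ⟨j1, hj1S, hpj1⟩ := hsur (k + 1) (by omega) (le_refl _)
    have hBest : Best f (k + 1) S = S.inf' hne (fun j => Best f k (S.erase j) + f k j) := by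
      conv_lhs => rw [Best]
      rw [dif_pos hne]
    have hcard' : (S.erase j1).card = k := by
      rw [Finset.card_erase_of_mem hj1S]
      omega
    have hih := ih (S.erase j1) hcard'
      (fun j0 hj0 => by
        have hm := Finset.mem_of_mem_erase hj0
        have h1 := hran j0 hm
        refine ⟨h1.1, ?_⟩
        by_contra hgt
        have : p (j0 + 1) = k + 1 := by omega
        have := hinj j0 j1 hm hj1S (by rw [this, hpj1])
        exact (Finset.ne_of_mem_erase hj0) this)
      (fun a b ha hb hab => hinj a b (Finset.mem_of_mem_erase ha) (Finset.mem_of_mem_erase hb) hab)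
      (fun r h1 h2 => by
        obtain ⟨j0, hj0S, hj0⟩ := hsur r h1 (by omega)
        refine ⟨j0, Finset.mem_erase.mpr ⟨?_, hj0S⟩, hj0⟩
        rintro rfl
        rw [hpj1] at hj0
        omega)
    have hstep : Best f (k + 1) S ≤ Best f k (S.erase j1) + f k j1 := by
      rw [hBest]
      exact Finset.inf'_le _ hj1S
    have hsum : (∑ j0 ∈ S.erase j1, f (p (j0 + 1) - 1) j0) + f (p (j1 + 1) - 1) j1 =
        ∑ j0 ∈ S, f (p (j0 + 1) - 1) j0 :=
      Finset.sum_erase_add S _ hj1S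
    have hfj1 : f (p (j1 + 1) - 1) j1 = f k j1 := by
      rw [hpj1]
      norm_num
    omega

theorem hungarian_eq_Best (c : List (List Int)) :
    hungarian_algorithm c =
      Best (cf0 c) c.length ((Finset.range c.length)) := by
  set n := c.length with hn
  set f : ℕ → ℕ → Int := fun i j => cf0 c i j with hf
  set s := (List.range' 1 n).foldl (outerStep f n)
    (fun _ => (0 : Int), fun _ => (0 : Int), fun _ => (0 : ℕ), fun _ => (0 : ℕ)) with hs
  have hport : hungarian_algorithm c =
      (List.range' 1 n).foldl (fun tc j => tc + f (s.2.2.1 j - 1) (j - 1)) 0 := rfl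
  set p := s.2.2.1 with hp
  set u := s.1 with hu
  set v := s.2.1 with hv
  have hO : OuterInv f n n u v p := outer_fold f n n (le_refl n)
  have hfull : ∀ j, 1 ≤ j → j ≤ n → p j ≠ 0 := full_match n p hO.mat
  have hBle : Best f n (Finset.range n) ≤ ∑ j0 ∈ Finset.range n, f (p (j0 + 1) - 1) j0 := by
    apply Best_le f p n (Finset.range n) (Finset.card_range n)
    · intro j0 hj0
      rw [Finset.mem_range] at hj0
      have hnz := hfull (j0 + 1) (by omega) (by omega)
      rcases hO.mat.ran (j0 + 1) (by omega) (by omega) with h | h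
      · exact absurd h hnz
      · exact h
    · intro a b ha hb hab
      rw [Finset.mem_range] at ha hb
      have hnz := hfull (a + 1) (by omega) (by omega)
      have := hO.mat.inj (a + 1) (b + 1) (by omega) (by omega) (by omega) (by omega) hnz hab
      omega
    · intro r h1 h2
      obtain ⟨j, hj1, hj2, hj3⟩ := hO.mat.sur r h1 h2
      refine ⟨j - 1, Finset.mem_range.mpr (by omega), ?_⟩
      have hjj : j - 1 + 1 = j := by omega
      rw [hjj, hj3]
  have hBge : (∑ r0 ∈ Finset.range n, u (r0 + 1)) + (∑ j0 ∈ Finset.range n, v (j0 + 1)) ≤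
      Best f n (Finset.range n) := by
    apply Best_ge f u v n (Finset.range n) (Finset.card_range n)
    intro r0 hr j0 hj0
    rw [Finset.mem_range] at hj0
    have := hO.feas (r0 + 1) (j0 + 1) (by omega) (by omega) (by omega) (by omega)
    simpa using this
  have htight : ∑ j0 ∈ Finset.range n, f (p (j0 + 1) - 1) j0 =
      (∑ r0 ∈ Finset.range n, u (r0 + 1)) + (∑ j0 ∈ Finset.range n, v (j0 + 1)) := by
    have h1 : ∀ j0 ∈ Finset.range n, f (p (j0 + 1) - 1) j0 = u (p (j0 + 1)) + v (j0 + 1) := by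
      intro j0 hj0
      rw [Finset.mem_range] at hj0
      have ht := hO.tight (j0 + 1) (by omega) (by omega) (hfull (j0 + 1) (by omega) (by omega))
      rw [Nat.add_sub_cancel] at ht
      omega
    rw [Finset.sum_congr rfl h1, Finset.sum_add_distrib]
    congr 1
    apply Finset.sum_bij (i := fun j0 _ => p (j0 + 1) - 1)
    · intro a ha
      rw [Finset.mem_range] at ha ⊢
      have hnz := hfull (a + 1) (by omega) (by omega)
      rcases hO.mat.ran (a + 1) (by omega) (by omega) with h | h
      · exact absurd h hnz
      · omega
    · intro a ha b hb hab
      rw [Finset.mem_range] at ha hb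
      have hnza := hfull (a + 1) (by omega) (by omega)
      have hnzb := hfull (b + 1) (by omega) (by omega)
      have hra := hO.mat.ran (a + 1) (by omega) (by omega)
      have hrb := hO.mat.ran (b + 1) (by omega) (by omega)
      have hpe : p (a + 1) = p (b + 1) := by
        rcases hra with h | h
        · exact absurd h hnza
        · rcases hrb with h' | h'
          · exact absurd h' hnzb
          · omega
      have := hO.mat.inj (a + 1) (b + 1) (by omega) (by omega) (by omega) (by omega) hnza hpe
      omega
    · intro r0 hr0
      rw [Finset.mem_range] at hr0
      obtain ⟨j, hj1, hj2, hj3⟩ := hO.mat.sur (r0 + 1) (by omega) (by omega)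
      refine ⟨j - 1, Finset.mem_range.mpr (by omega), ?_⟩
      have hjj : j - 1 + 1 = j := by omega
      rw [hjj, hj3]
      omega
    · intro a ha
      rw [Finset.mem_range] at ha
      have hnz := hfull (a + 1) (by omega) (by omega)
      have hjj : p (a + 1) - 1 + 1 = p (a + 1) := by omega
      rw [hjj]
  rw [hport, foldl_add_g, sum_range'_eq, zero_add]
  have hsum1 : ∑ j0 ∈ Finset.range n, f (p (1 + j0) - 1) (1 + j0 - 1) =
      ∑ j0 ∈ Finset.range n, f (p (j0 + 1) - 1) j0 := by
    apply Finset.sum_congr rfl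
    intro j0 _
    have h1 : 1 + j0 = j0 + 1 := by omega
    rw [h1]
    norm_num
  rw [hsum1, htight]
  rw [htight] at hBle
  exact le_antisymm hBge hBle

-- ===== VERDICT (by name: the statement is the Claim_ definition above) =====
theorem hungarian_algorithm_spec : Claim_equal_hungarian_algorithm := by
  intro c _ _
  unfold Spec_hungarian_algorithm
  rw [hungarian_alt_eq_Best, hungarian_eq_Best]
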